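-- pv_equiv track=rewrite | github.com/stefanopalmieri/finite-magma-independence | partition_uniqueness.py | compute_orbits
-- ===== SOURCE A (Python) =====
-- def compute_orbits(n, automorphisms):
--     """Compute orbits of elements under the automorphism group."""
--     # Union-find
--     parent = list(range(n))
--
--     def find(x):
--         while parent[x] != x:
--             parent[x] = parent[parent[x]]
--             x = parent[x]
--         return x
--
--     def union(x, y):
--         rx, ry = find(x), find(y)
--         if rx != ry:
--             parent[rx] = ry
--
--     for aut in automorphisms:
--         for i in range(n):
--             union(i, aut[i])
--
--     orbits = {}
--     for i in range(n):
--         r = find(i)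
--         orbits.setdefault(r, set()).add(i)
--
--     return list(orbits.values())
-- ===== SOURCE B (Python) =====
-- def compute_orbits(n, automorphisms):
--     """Compute orbits of elements under the automorphism group.
--
--     Alternative algorithm: build an explicit undirected graph and label
--     connected components with an iterative DFS, then group elements by label.
--     """
--     adj = [[] for _ in range(n)]
--     for aut in automorphisms:
--         for i in range(n):
--             j = aut[i]
--             adj[i].append(j)
--             adj[j].append(i)
--
--     comp = [-1] * n
--     c = 0
--     for s in range(n):
--         if comp[s] == -1:
--             comp[s] = c
--             stack = [s]
--             while stack:
--                 x = stack.pop()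
--                 for y in adj[x]:
--                     if comp[y] == -1:
--                         comp[y] = c
--                         stack.append(y)
--             c += 1
--
--     orbits = [set() for _ in range(c)]
--     for i in range(n):
--         orbits[comp[i]].add(i)
--     return orbits
-- ===== Notes on version B (the rewrite author's own statement) =====
-- stated objective: alternative
-- what changed: Replaces the union-find (path-halving find + union) partition computation with an explicit undirected adjacency graph whose connected components are labeled by an iterative depth-first search and then grouped by label.
-- outside the precondition, e.g. on compute_orbits(2, [[-1, 0]]): A returns [{0, 1}], B returns [{0, 1}]; on compute_orbits(3, [[-1, -2, -3]]): A returns [{0, 2}, {1}], B returns [{0, 2}, {1}]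
import Mathlib
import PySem

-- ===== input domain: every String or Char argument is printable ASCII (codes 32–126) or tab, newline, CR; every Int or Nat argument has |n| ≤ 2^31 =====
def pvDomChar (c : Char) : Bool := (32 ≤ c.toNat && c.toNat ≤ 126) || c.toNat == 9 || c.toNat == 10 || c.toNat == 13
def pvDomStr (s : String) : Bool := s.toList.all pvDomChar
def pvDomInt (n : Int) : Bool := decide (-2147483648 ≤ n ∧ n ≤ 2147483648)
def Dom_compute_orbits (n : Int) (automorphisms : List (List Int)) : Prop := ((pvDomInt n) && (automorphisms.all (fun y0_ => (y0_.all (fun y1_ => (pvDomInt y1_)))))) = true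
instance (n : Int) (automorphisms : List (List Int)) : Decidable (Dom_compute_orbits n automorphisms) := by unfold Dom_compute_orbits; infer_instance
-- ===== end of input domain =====

-- ===== PORT A =====
-- B replaces union-find with explicit-graph DFS component labeling; objective: alternative algorithm of similar cost.

-- find(x) with path halving; the while loop is ported with fuel parent.length + 1,
-- which suffices on every admitted input (proved below); returns the mutated parent and the root.
def ufFind (fuel : Nat) (parent : List Int) (x : Int) : List Int × Int :=
  match fuel with
  | 0 => (parent, x)
  | f + 1 =>
    if PySem.List.pyGetD parent x 0 ≠ x then
      let parent' := PySem.List.pySetD parent x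
        (PySem.List.pyGetD parent (PySem.List.pyGetD parent x 0) 0)
      ufFind f parent' (PySem.List.pyGetD parent' x 0)
    else (parent, x)

def ufFindTop (parent : List Int) (x : Int) : List Int × Int :=
  ufFind (parent.length + 1) parent x

def ufUnion (parent : List Int) (x y : Int) : List Int :=
  let r1 := ufFindTop parent x
  let r2 := ufFindTop r1.1 y
  if r1.2 ≠ r2.2 then PySem.List.pySetD r2.1 r1.2 r2.2 else r2.1

def compute_orbits (n : Int) (automorphisms : List (List Int)) : List (List Int) :=
  let parent0 := PySem.List.pyRange 0 n 1
  let parent1 := automorphisms.foldl (fun p aut =>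
    (PySem.List.pyRange 0 n 1).foldl (fun p i => ufUnion p i (PySem.List.pyGetD aut i 0)) p) parent0
  let st := (PySem.List.pyRange 0 n 1).foldl
    (fun (st : List Int × PySem.Dict Int (PySem.Set Int)) i =>
      let fr := ufFindTop st.1 i
      (fr.1, PySem.Dict.modify st.2 fr.2 PySem.Set.empty (fun t => PySem.Set.add t i)))
    (parent1, PySem.Dict.empty)
  PySem.Dict.values st.2

-- ===== PORT B =====
-- the DFS while loop, ported with fuel adj.length + 1 (sufficient on every admitted input, proved below)
def dfsLoop (fuel : Nat) (adj : List (List Int)) (c : Int) (comp : List Int) (stack : List Int) : List Int :=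
  match fuel with
  | 0 => comp
  | f + 1 =>
    match PySem.List.pop? stack (-1) with
    | none => comp
    | some xr =>
      let st := (PySem.List.pyGetD adj xr.1 []).foldl
        (fun (st : List Int × List Int) y =>
          if PySem.List.pyGetD st.1 y 0 = -1 then (PySem.List.pySetD st.1 y c, st.2 ++ [y]) else st)
        (comp, xr.2)
      dfsLoop f adj c st.1 st.2

def compute_orbits_alt (n : Int) (automorphisms : List (List Int)) : List (List Int) :=
  let adj0 : List (List Int) := (PySem.List.pyRange 0 n 1).map (fun _ => [])
  let adj := automorphisms.foldl (fun adj aut =>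
    (PySem.List.pyRange 0 n 1).foldl (fun adj i =>
      let j := PySem.List.pyGetD aut i 0
      let adj1 := PySem.List.pySetD adj i (PySem.List.pyGetD adj i [] ++ [j])
      PySem.List.pySetD adj1 j (PySem.List.pyGetD adj1 j [] ++ [i])) adj) adj0
  let st := (PySem.List.pyRange 0 n 1).foldl
    (fun (st : List Int × Int) s =>
      if PySem.List.pyGetD st.1 s 0 = -1 then
        (dfsLoop (adj.length + 1) adj st.2 (PySem.List.pySetD st.1 s st.2) [s], st.2 + 1)
      else st)
    ((PySem.List.pyRange 0 n 1).map (fun _ => (-1 : Int)), 0)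
  let orbits0 : List (PySem.Set Int) := (PySem.List.pyRange 0 st.2 1).map (fun _ => PySem.Set.empty)
  (PySem.List.pyRange 0 n 1).foldl (fun orbits i =>
    PySem.List.pySetD orbits (PySem.List.pyGetD st.1 i 0)
      (PySem.Set.add (PySem.List.pyGetD orbits (PySem.List.pyGetD st.1 i 0) []) i)) orbits0

-- ===== PRECONDITION & SPEC =====
-- Pre_ restricts to well-formed automorphism tables — every row has length at least n with its first n
-- entries in [0, n), the function's natural domain.  Rows with entries in [-n, -1], on which A still
-- returns a value through Python's accidental negative-index wraparound, are excluded.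
def Pre_compute_orbits (n : Int) (automorphisms : List (List Int)) : Prop :=
  ∀ aut ∈ automorphisms, n ≤ (aut.length : Int) ∧ ∀ j ∈ aut.take n.toNat, 0 ≤ j ∧ j < n

instance (n : Int) (automorphisms : List (List Int)) : Decidable (Pre_compute_orbits n automorphisms) := by
  unfold Pre_compute_orbits; infer_instance

def pvWitness_compute_orbits : Int × List (List Int) := (4, [[1, 0, 3, 2], [0, 1, 3, 2]])

def Spec_compute_orbits (n : Int) (automorphisms : List (List Int)) (out : List (List Int)) : Prop := out = compute_orbits_alt n automorphisms
instance (n : Int) (automorphisms : List (List Int)) (out : List (List Int)) : Decidable (Spec_compute_orbits n automorphisms out) := by unfold Spec_compute_orbits; infer_instance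

-- ===== CLAIM (what is proved, stated in full; the proofs are below) =====
def Claim_equal_compute_orbits : Prop := ∀ (n : Int) (automorphisms : List (List Int)), Dom_compute_orbits n automorphisms → Pre_compute_orbits n automorphisms → Spec_compute_orbits n automorphisms (compute_orbits n automorphisms)

-- ===== LEMMAS AND PROOFS =====

-- value of a parent list at a Nat index, as a Nat
def pvF (p : List Int) (k : Nat) : Nat := (p.getD k 0).toNat

-- f reaches a fixpoint from x within d steps
def RchF (f : Nat → Nat) (x d : Nat) : Prop := f (f^[d] x) = f^[d] x

def rootF (N : Nat) (f : Nat → Nat) (x : Nat) : Nat := f^[N] x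

theorem rchF_stab {f : Nat → Nat} {x d : Nat} (h : RchF f x d) :
    ∀ e, d ≤ e → f^[e] x = f^[d] x := by
  intro e he
  obtain ⟨k, rfl⟩ := Nat.exists_eq_add_of_le he
  induction k with
  | zero => rfl
  | succ k ih =>
    have h1 : d + (k+1) = (d + k) + 1 := by omega
    rw [h1, Function.iterate_succ_apply', ih (by omega)]
    exact h

theorem rchF_mono {f : Nat → Nat} {x d e : Nat} (h : RchF f x d) (hde : d ≤ e) : RchF f x e := by
  unfold RchF
  rw [rchF_stab h e hde]; exact h

theorem rchF_step {f : Nat → Nat} {x d : Nat} (h : RchF f x (d+1)) : RchF f (f x) d := by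
  unfold RchF at h ⊢
  rwa [← Function.iterate_succ_apply]

theorem rchF_of_step {f : Nat → Nat} {x d : Nat} (h : RchF f (f x) d) : RchF f x (d+1) := by
  unfold RchF at h ⊢
  rwa [Function.iterate_succ_apply]

-- a point on a nontrivial cycle that also reaches a fixpoint is itself fixed
theorem cycle_fix {f : Nat → Nat} {x a d : Nat} (ha : 0 < a) (hcyc : f^[a] x = x)
    (hfix : RchF f x d) : f x = x := by
  have hper : ∀ m, f^[m * a] x = x := by
    intro m
    induction m with
    | zero => simp
    | succ m ih => rw [Nat.succ_mul, Function.iterate_add_apply, hcyc, ih]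
  have h1 : f^[(d+1) * a] x = f^[d] x := rchF_stab hfix _ (by nlinarith)
  have h2 : f^[d] x = x := by rw [← h1, hper]
  have := hfix
  unfold RchF at this
  rwa [h2] at this

-- closure of [0,N) under f
def ClF (N : Nat) (f : Nat → Nat) : Prop := ∀ y, y < N → f y < N

theorem iterates_lt {N : Nat} {f : Nat → Nat} (hcl : ClF N f) {x : Nat} (hx : x < N) :
    ∀ k, f^[k] x < N := by
  intro k
  induction k with
  | zero => exact hx
  | succ k ih => rw [Function.iterate_succ_apply']; exact hcl _ ih

theorem rch_N {N : Nat} {f : Nat → Nat} (hcl : ClF N f) {x d : Nat} (hx : x < N)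
    (h : RchF f x d) : RchF f x N := by
  have hmaps : ∀ i ∈ Finset.range (N+1), f^[i] x ∈ Finset.range N := by
    intro i _
    exact Finset.mem_range.mpr (iterates_lt hcl hx i)
  have hcard : (Finset.range N).card < (Finset.range (N+1)).card := by simp
  obtain ⟨a0, ha0, b0, hb0, hab0, heq0⟩ :=
    Finset.exists_ne_map_eq_of_card_lt_of_maps_to hcard hmaps
  obtain ⟨a, b, ha, hlt, heq⟩ : ∃ a b, a ∈ Finset.range (N+1) ∧ a < b ∧ f^[a] x = f^[b] x := by
    rcases Nat.lt_or_ge a0 b0 with hc | hc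
    · exact ⟨a0, b0, ha0, hc, heq0⟩
    · exact ⟨b0, a0, hb0, by omega, heq0.symm⟩
  have hy : f^[b-a] (f^[a] x) = f^[a] x := by
    rw [← Function.iterate_add_apply, Nat.sub_add_cancel (by omega)]
    exact heq.symm
  have hRy : RchF f (f^[a] x) d := by
    unfold RchF
    rw [← Function.iterate_add_apply, rchF_stab h (d + a) (by omega)]
    exact h
  have hfixy := cycle_fix (a := b - a) (by omega) hy hRy
  have hra : RchF f x a := hfixy
  exact rchF_mono hra (by have := Finset.mem_range.mp ha; omega)

theorem rootF_step {N : Nat} {f : Nat → Nat} {x : Nat} (h : RchF f x N) :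
    rootF N f (f x) = rootF N f x := by
  unfold rootF
  rw [← Function.iterate_succ_apply]
  exact rchF_stab h (N+1) (by omega)

theorem rootF_of_fix {N : Nat} {f : Nat → Nat} {x : Nat} (h : f x = x) : rootF N f x = x :=
  Function.iterate_fixed h N

-- updating f at a point no iterate from y hits leaves iterates from y unchanged
theorem iterate_update_of_noRevisit {f : Nat → Nat} {x v y : Nat}
    (h : ∀ k, f^[k] y ≠ x) : ∀ k, (Function.update f x v)^[k] y = f^[k] y := by
  intro k
  induction k generalizing y with
  | zero => rfl
  | succ k ih =>
    rw [Function.iterate_succ_apply, Function.iterate_succ_apply]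
    have hy : y ≠ x := h 0
    rw [Function.update_of_ne hy]
    exact ih (fun k => by simpa [Function.iterate_succ_apply] using h (k+1))

theorem no_revisit {f : Nat → Nat} {x d : Nat} (hfx : f x ≠ x) (h : RchF f x d) :
    ∀ k, f^[k] (f (f x)) ≠ x := by
  intro k hk
  have hcyc : f^[k+2] x = x := by
    rw [show k + 2 = k + 2 from rfl, Function.iterate_add_apply]
    simpa using hk
  exact hfx (cycle_fix (a := k+2) (by omega) hcyc h)

-- path halving: reachability is preserved
theorem halve_rch {f : Nat → Nat} {x d : Nat} (hfx : f x ≠ x) (hRx : RchF f x d) :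
    ∀ dy y, RchF f y dy → ∃ e, RchF (Function.update f x (f (f x))) y e := by
  intro dy
  induction dy using Nat.strong_induction_on with
  | _ dy ih =>
    intro y hRy
    by_cases hy : f y = y
    · have hyx : y ≠ x := fun h => hfx (h ▸ hy)
      exact ⟨0, by simpa [RchF, Function.update_of_ne hyx] using hy⟩
    · have hdy : dy ≠ 0 := fun h => hy (by simpa [RchF, h] using hRy)
      by_cases hyx : y = x
      · subst hyx
        have e2 : f (f y) = f^[2] y := rfl
        have hR2 : ∃ d2, RchF f (f (f y)) d2 := by
          rcases Nat.eq_zero_or_pos d with hd | hd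
          · exact absurd (by simpa [RchF, hd] using hRx) hy
          · rcases Nat.lt_or_ge d 2 with h2 | h2
            · have hd1 : d = 1 := by omega
              have hfix : f (f y) = f y := by simpa [RchF, hd1] using hRx
              exact ⟨0, by simp [RchF, hfix]⟩
            · refine ⟨d - 2, ?_⟩
              unfold RchF
              rw [e2, ← Function.iterate_add_apply, show d - 2 + 2 = d by omega]
              exact hRx
        obtain ⟨d2, hR2⟩ := hR2
        have htr := iterate_update_of_noRevisit (x := y) (v := f (f y)) (no_revisit hfx hRy)
        refine ⟨d2 + 1, ?_⟩
        apply rchF_of_step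
        unfold RchF
        rw [Function.update_self, htr]
        have hne : f^[d2] (f (f y)) ≠ y := no_revisit hfx hRy d2
        rw [Function.update_of_ne hne]
        exact hR2
      · have hstep : RchF f (f y) (dy - 1) := by
          have := rchF_step (x := y) (d := dy - 1) (by rwa [show dy - 1 + 1 = dy by omega])
          exact this
        obtain ⟨e, he⟩ := ih (dy - 1) (by omega) (f y) hstep
        refine ⟨e + 1, ?_⟩
        apply rchF_of_step
        rwa [Function.update_of_ne hyx]

-- path halving preserves every root
theorem halve_root {N : Nat} {f : Nat → Nat} {x : Nat} (hcl : ClF N f)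
    (hall : ∀ y, y < N → ∃ d, RchF f y d) (hx : x < N) (hfx : f x ≠ x) :
    ∀ dy y, y < N → RchF f y dy →
      rootF N (Function.update f x (f (f x))) y = rootF N f y := by
  have hffx : f (f x) < N := hcl _ (hcl _ hx)
  have hcl' : ClF N (Function.update f x (f (f x))) := by
    intro y hy
    by_cases hyx : y = x
    · subst hyx; rwa [Function.update_self]
    · rw [Function.update_of_ne hyx]; exact hcl _ hy
  obtain ⟨dx, hRx⟩ := hall x hx
  have hall' : ∀ y, y < N → ∃ d, RchF (Function.update f x (f (f x))) y d := by
    intro y hy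
    obtain ⟨dy, hRy⟩ := hall y hy
    exact halve_rch hfx hRx dy y hRy
  intro dy
  induction dy using Nat.strong_induction_on with
  | _ dy ih =>
    intro y hy hRy
    by_cases hfix : f y = y
    · have hyx : y ≠ x := fun h => hfx (h ▸ hfix)
      rw [rootF_of_fix hfix, rootF_of_fix (by rwa [Function.update_of_ne hyx])]
    · by_cases hyx : y = x
      · subst hyx
        have hR'y : RchF (Function.update f y (f (f y))) y N := by
          obtain ⟨d', hd'⟩ := hall' y hy
          exact rch_N hcl' hy hd'
        rw [← rootF_step hR'y, Function.update_self]
        have htr := iterate_update_of_noRevisit (x := y) (v := f (f y)) (no_revisit hfix hRy)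
        unfold rootF
        rw [htr N]
        have e2 : f (f y) = f^[2] y := rfl
        rw [e2, ← Function.iterate_add_apply]
        exact rchF_stab (rch_N hcl hy hRy) (N + 2) (by omega)
      · have hdy : dy ≠ 0 := fun h => hfix (by simpa [RchF, h] using hRy)
        have hstep : RchF f (f y) (dy - 1) := rchF_step (x := y) (d := dy - 1)
          (by rwa [show dy - 1 + 1 = dy by omega])
        have hR'y : RchF (Function.update f x (f (f x))) y N := by
          obtain ⟨d', hd'⟩ := hall' y hy
          exact rch_N hcl' hy hd'
        rw [← rootF_step hR'y, Function.update_of_ne hyx,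
          ih (dy - 1) (by omega) (f y) (hcl _ hy) hstep,
          rootF_step (rch_N hcl hy hRy)]

-- linking two roots preserves reachability
theorem union_rch {f : Nat → Nat} {rx ry : Nat} (hfrx : f rx = rx) (hfry : f ry = ry)
    (hne : rx ≠ ry) :
    ∀ dy y, RchF f y dy → ∃ e, RchF (Function.update f rx ry) y e := by
  intro dy
  induction dy using Nat.strong_induction_on with
  | _ dy ih =>
    intro y hRy
    by_cases hyrx : y = rx
    · subst hyrx
      refine ⟨1, ?_⟩
      have h1 : (Function.update f y ry)^[1] y = ry := by
        simp [Function.update_self]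
      unfold RchF
      rw [h1, Function.update_of_ne (Ne.symm hne)]
      exact hfry
    · by_cases hfix : f y = y
      · exact ⟨0, by simpa [RchF, Function.update_of_ne hyrx] using hfix⟩
      · have hdy : dy ≠ 0 := fun h => hfix (by simpa [RchF, h] using hRy)
        have hstep : RchF f (f y) (dy - 1) := rchF_step (x := y) (d := dy - 1)
          (by rwa [show dy - 1 + 1 = dy by omega])
        obtain ⟨e, he⟩ := ih (dy - 1) (by omega) (f y) hstep
        refine ⟨e + 1, ?_⟩
        apply rchF_of_step
        rwa [Function.update_of_ne hyrx]

-- linking two roots maps every root through the evident collapse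
theorem union_root {N : Nat} {f : Nat → Nat} {rx ry : Nat} (hcl : ClF N f)
    (hall : ∀ y, y < N → ∃ d, RchF f y d) (hrx : rx < N) (hry : ry < N)
    (hfrx : f rx = rx) (hfry : f ry = ry) (hne : rx ≠ ry) :
    ∀ dy y, y < N → RchF f y dy →
      rootF N (Function.update f rx ry) y =
        if rootF N f y = rx then ry else rootF N f y := by
  have hcl' : ClF N (Function.update f rx ry) := by
    intro y hy
    by_cases hyx : y = rx
    · subst hyx; rwa [Function.update_self]
    · rw [Function.update_of_ne hyx]; exact hcl _ hy
  have hall' : ∀ y, y < N → ∃ d, RchF (Function.update f rx ry) y d := by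
    intro y hy
    obtain ⟨dy, hRy⟩ := hall y hy
    exact union_rch hfrx hfry hne dy y hRy
  intro dy
  induction dy using Nat.strong_induction_on with
  | _ dy ih =>
    intro y hy hRy
    by_cases hyrx : y = rx
    · subst hyrx
      rw [rootF_of_fix hfrx, if_pos rfl]
      have hR'y : RchF (Function.update f y ry) y N := by
        obtain ⟨d', hd'⟩ := hall' y hy
        exact rch_N hcl' hy hd'
      rw [← rootF_step hR'y, Function.update_self]
      exact rootF_of_fix (by rw [Function.update_of_ne (Ne.symm hne)]; exact hfry)
    · by_cases hfix : f y = y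
      · rw [rootF_of_fix hfix, if_neg hyrx]
        exact rootF_of_fix (by rwa [Function.update_of_ne hyrx])
      · have hdy : dy ≠ 0 := fun h => hfix (by simpa [RchF, h] using hRy)
        have hstep : RchF f (f y) (dy - 1) := rchF_step (x := y) (d := dy - 1)
          (by rwa [show dy - 1 + 1 = dy by omega])
        have hR'y : RchF (Function.update f rx ry) y N := by
          obtain ⟨d', hd'⟩ := hall' y hy
          exact rch_N hcl' hy hd'
        rw [← rootF_step hR'y, Function.update_of_ne hyrx,
          ih (dy - 1) (by omega) (f y) (hcl _ hy) hstep,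
          rootF_step (rch_N hcl hy hRy)]

-- the compatibility chain: an element is C-related to each of its iterates
theorem compat_iterate {N : Nat} {C : Nat → Nat → Prop} {f : Nat → Nat}
    (hrefl : ∀ y, y < N → C y y) (htrans : ∀ {a b c}, C a b → C b c → C a c)
    (hcomp : ∀ y, y < N → C y (f y)) (hcl : ClF N f) :
    ∀ k y, y < N → C y (f^[k] y) := by
  intro k
  induction k with
  | zero => intro y hy; exact hrefl y hy
  | succ k ih =>
    intro y hy
    rw [Function.iterate_succ_apply']
    exact htrans (ih y hy) (hcomp _ (iterates_lt hcl hy k))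

-- list-level well-formedness of a union-find parent array
def UFok (N : Nat) (p : List Int) : Prop :=
  p.length = N ∧ (∀ k, k < N → 0 ≤ p.getD k 0 ∧ p.getD k 0 < (N : Int)) ∧
  (∀ k, k < N → ∃ d, RchF (pvF p) k d)

def CompatL (N : Nat) (C : Nat → Nat → Prop) (p : List Int) : Prop :=
  ∀ k, k < N → C k (pvF p k)

theorem pvF_lt {N : Nat} {p : List Int} (h : UFok N p) {k : Nat} (hk : k < N) : pvF p k < N := by
  have := (h.2.1 k hk).2
  unfold pvF
  omega

theorem pvF_cast {N : Nat} {p : List Int} (h : UFok N p) {k : Nat} (hk : k < N) :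
    ((pvF p k : Nat) : Int) = p.getD k 0 := by
  have := (h.2.1 k hk).1
  unfold pvF
  omega

theorem ufok_cl {N : Nat} {p : List Int} (h : UFok N p) : ClF N (pvF p) :=
  fun _ hy => pvF_lt h hy

theorem pvF_set {p : List Int} {x : Nat} (hx : x < p.length) (w : Nat) :
    pvF (p.set x ((w : Nat) : Int)) = Function.update (pvF p) x w := by
  funext k
  by_cases hk : k = x
  · subst hk
    simp [pvF, Function.update_self, List.getD, hx]
  · simp [pvF, Function.update_of_ne hk, List.getD, List.getElem?_set_ne (Ne.symm hk)]

theorem rch_ffx {f : Nat → Nat} {x d : Nat} (hfx : f x ≠ x) (h : RchF f x d) :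
    RchF f (f (f x)) (d - 1) := by
  rcases Nat.eq_zero_or_pos d with hd | hd
  · exact absurd (by simpa [RchF, hd] using h) hfx
  · rcases Nat.lt_or_ge d 2 with h2 | h2
    · have hd1 : d = 1 := by omega
      have hfix : f (f x) = f x := by simpa [RchF, hd1] using h
      have : RchF f (f (f x)) 0 := by simp [RchF, hfix]
      exact rchF_mono this (by omega)
    · have : RchF f (f (f x)) (d - 2) := by
        unfold RchF
        rw [show f (f x) = f^[2] x from rfl, ← Function.iterate_add_apply,
          show d - 2 + 2 = d by omega]
        exact h
      exact rchF_mono this (by omega)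

theorem rch_halve_ffx {f : Nat → Nat} {x d : Nat} (hfx : f x ≠ x) (h : RchF f x d) :
    RchF (Function.update f x (f (f x))) (f (f x)) (d - 1) := by
  have htr := iterate_update_of_noRevisit (x := x) (v := f (f x)) (no_revisit hfx h)
  unfold RchF
  rw [htr, Function.update_of_ne (no_revisit hfx h (d-1))]
  exact rch_ffx hfx h

-- the central find lemma: ufFind returns the root and preserves all roots,
-- fixpoints, well-formedness and compatibility
theorem uf_find_spec {N : Nat} {C : Nat → Nat → Prop}
    (hrefl : ∀ y, y < N → C y y) (htrans : ∀ {a b c}, C a b → C b c → C a c) :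
    ∀ fuel d (p : List Int) (x : Nat), UFok N p → CompatL N C p → x < N →
      RchF (pvF p) x d → d < fuel →
    ∃ q, ufFind fuel p (x : Int) = (q, ((rootF N (pvF p) x : Nat) : Int)) ∧
      UFok N q ∧ CompatL N C q ∧ (∀ y, y < N → rootF N (pvF q) y = rootF N (pvF p) y) ∧
      (∀ r, r < N → pvF p r = r → pvF q r = r) := by
  intro fuel
  induction fuel with
  | zero => intro d p x _ _ _ _ h; omega
  | succ fuel ih =>
    intro d p x hok hcomp hx hR hd
    have hlen : p.length = N := hok.1
    have hget : PySem.List.pyGetD p (x : Int) 0 = p.getD x 0 := by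
      simp [PySem.List.pyGetD_natCast]
    by_cases hfix : pvF p x = x
    · have hcond : PySem.List.pyGetD p (x : Int) 0 = (x : Int) := by
        rw [hget, ← pvF_cast hok hx, hfix]
      refine ⟨p, ?_, hok, hcomp, fun y _ => rfl, fun r _ h => h⟩
      rw [ufFind]
      simp only [hcond, ne_eq, not_true_eq_false, if_false]
      rw [rootF_of_fix hfix]
    · set f := pvF p with hf
      have hcond : PySem.List.pyGetD p (x : Int) 0 ≠ (x : Int) := by
        rw [hget, ← pvF_cast hok hx]
        exact_mod_cast fun h => hfix (by exact_mod_cast h)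
      have hfxN : f x < N := pvF_lt hok hx
      have hffxN : f (f x) < N := pvF_lt hok hfxN
      have hv : PySem.List.pyGetD p (PySem.List.pyGetD p (x : Int) 0) 0 = ((f (f x) : Nat) : Int) := by
        rw [hget, ← pvF_cast hok hx]
        rw [PySem.List.pyGetD_natCast]
        exact (pvF_cast hok hfxN).symm
      have hset : PySem.List.pySetD p (x : Int) (((f (f x) : Nat) : Int)) = p.set x ((f (f x) : Nat) : Int) := by
        simp [PySem.List.pySetD_natCast]
      set p' := p.set x ((f (f x) : Nat) : Int) with hp'
      have hpv' : pvF p' = Function.update f x (f (f x)) := pvF_set (hlen ▸ hx) _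
      have hget' : PySem.List.pyGetD p' (x : Int) 0 = ((f (f x) : Nat) : Int) := by
        rw [PySem.List.pyGetD_natCast]
        simp [hp', List.getD, hlen ▸ hx]
      -- well-formedness of p'
      have hok' : UFok N p' := by
        refine ⟨by simp [hp', hlen], ?_, ?_⟩
        · intro k hk
          by_cases hkx : k = x
          · rw [hkx]
            have hgx : p'.getD x 0 = ((f (f x) : Nat) : Int) := by
              simp [hp', List.getD, show x < p.length from hlen ▸ hx]
            rw [hgx]
            exact ⟨by positivity, by exact_mod_cast hffxN⟩
          · have : p'.getD k 0 = p.getD k 0 := by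
              simp [hp', List.getD, List.getElem?_set_ne (Ne.symm hkx)]
            rw [this]
            exact hok.2.1 k hk
        · intro k hk
          obtain ⟨dk, hdk⟩ := hok.2.2 k hk
          rw [hpv']
          exact halve_rch hfix hR dk k hdk
      have hcomp' : CompatL N C p' := by
        intro k hk
        rw [hpv']
        by_cases hkx : k = x
        · subst hkx
          rw [Function.update_self]
          exact htrans (hcomp k hk) (hcomp _ hfxN)
        · rw [Function.update_of_ne hkx]
          exact hcomp k hk
      have hR' : RchF (pvF p') (f (f x)) (d - 1) := by
        rw [hpv']
        exact rch_halve_ffx hfix hR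
      have hd' : d - 1 < fuel := by
        have hd0 : d ≠ 0 := fun h => hfix (by simpa [RchF, h] using hR)
        omega
      obtain ⟨q, heq, hokq, hcompq, hroots, hfixes⟩ :=
        ih (d - 1) p' (f (f x)) hok' hcomp' hffxN hR' hd'
      have hrootp' : ∀ y, y < N → rootF N (pvF p') y = rootF N f y := by
        intro y hy
        obtain ⟨dy, hdy⟩ := hok.2.2 y hy
        rw [hpv']
        exact halve_root (ufok_cl hok) hok.2.2 hx hfix dy y hy hdy
      refine ⟨q, ?_, hokq, hcompq, ?_, ?_⟩
      · rw [ufFind]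
        simp only [hcond, ne_eq, not_false_eq_true, if_true]
        rw [hv, hset, hget', heq]
        congr 2
        rw [hrootp' _ hffxN]
        unfold rootF
        rw [show f (f x) = f^[2] x from rfl, ← Function.iterate_add_apply]
        exact rchF_stab (rch_N (ufok_cl hok) hx hR) (N + 2) (by omega)
      · intro y hy
        rw [hroots y hy, hrootp' y hy]
      · intro r hr hfr
        apply hfixes r hr
        rw [hpv']
        have hrx : r ≠ x := by
          intro he
          subst he
          exact hfix hfr
        rw [Function.update_of_ne hrx]
        exact hfr

theorem uf_findTop_spec {N : Nat} {C : Nat → Nat → Prop}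
    (hrefl : ∀ y, y < N → C y y) (htrans : ∀ {a b c}, C a b → C b c → C a c)
    (p : List Int) (x : Nat) (hok : UFok N p) (hcomp : CompatL N C p) (hx : x < N) :
    ∃ q, ufFindTop p (x : Int) = (q, ((rootF N (pvF p) x : Nat) : Int)) ∧
      UFok N q ∧ CompatL N C q ∧ (∀ y, y < N → rootF N (pvF q) y = rootF N (pvF p) y) ∧
      (∀ r, r < N → pvF p r = r → pvF q r = r) := by
  obtain ⟨d, hd⟩ := hok.2.2 x hx
  have hRN : RchF (pvF p) x N := rch_N (ufok_cl hok) hx hd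
  have hfuel : p.length + 1 = N + 1 := by rw [hok.1]
  unfold ufFindTop
  rw [hfuel]
  exact uf_find_spec hrefl htrans (N+1) N p x hok hcomp hx hRN (by omega)

theorem root_fix {N : Nat} {f : Nat → Nat} {x : Nat} (h : RchF f x N) :
    f (rootF N f x) = rootF N f x := h

theorem uf_union_spec {N : Nat} {C : Nat → Nat → Prop}
    (hrefl : ∀ y, y < N → C y y) (hsymm : ∀ {a b}, C a b → C b a)
    (htrans : ∀ {a b c}, C a b → C b c → C a c)
    (p : List Int) (x y : Nat) (hok : UFok N p) (hcomp : CompatL N C p)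
    (hx : x < N) (hy : y < N) (hCxy : C x y) :
    ∃ q, ufUnion p (x : Int) (y : Int) = q ∧ UFok N q ∧ CompatL N C q ∧
      (∀ z, z < N → rootF N (pvF q) z =
        if rootF N (pvF p) z = rootF N (pvF p) x then rootF N (pvF p) y
        else rootF N (pvF p) z) := by
  set f := pvF p with hf
  obtain ⟨p1, e1, hok1, hcomp1, hroots1, hfix1⟩ := uf_findTop_spec hrefl htrans p x hok hcomp hx
  obtain ⟨p2, e2, hok2, hcomp2, hroots2, hfix2⟩ := uf_findTop_spec hrefl htrans p1 y hok1 hcomp1 hy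
  set rx := rootF N f x with hrx
  set ry := rootF N f y with hry
  have hry1 : rootF N (pvF p1) y = ry := hroots1 y hy
  have hrxN : rx < N := iterates_lt (ufok_cl hok) hx N
  have hryN : ry < N := iterates_lt (ufok_cl hok) hy N
  have hRx : RchF f x N := rch_N (ufok_cl hok) hx (hok.2.2 x hx).choose_spec
  have hRy : RchF f y N := rch_N (ufok_cl hok) hy (hok.2.2 y hy).choose_spec
  have hfrx : f rx = rx := root_fix hRx
  have hfry : f ry = ry := root_fix hRy
  have hfrx2 : pvF p2 rx = rx := hfix2 rx hrxN (hfix1 rx hrxN hfrx)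
  have hfry2 : pvF p2 ry = ry := hfix2 ry hryN (hfix1 ry hryN hfry)
  have hroots12 : ∀ z, z < N → rootF N (pvF p2) z = rootF N f z := by
    intro z hz
    rw [hroots2 z hz, hroots1 z hz]
  have hCrxry : C rx ry := by
    have h1 : C x rx := compat_iterate hrefl htrans hcomp (ufok_cl hok) N x hx
    have h2 : C y ry := compat_iterate hrefl htrans hcomp (ufok_cl hok) N y hy
    exact htrans (hsymm h1) (htrans hCxy h2)
  by_cases hcase : rx = ry
  · refine ⟨p2, ?_, hok2, hcomp2, ?_⟩
    · show ufUnion p (x : Int) (y : Int) = p2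
      unfold ufUnion
      rw [e1]
      simp only [e2, hry1]
      rw [if_neg (by simp [hcase])]
    · intro z hz
      rw [hroots12 z hz]
      split_ifs with h
      · rw [← hcase, h]
      · rfl
  · set q := p2.set rx ((ry : Nat) : Int) with hq
    have hpvq : pvF q = Function.update (pvF p2) rx ry := pvF_set (hok2.1 ▸ hrxN) _
    have hclq : ClF N (pvF q) := by
      intro z hz
      rw [hpvq]
      by_cases hzx : z = rx
      · rw [hzx, Function.update_self]; exact hryN
      · rw [Function.update_of_ne hzx]; exact ufok_cl hok2 _ hz
    refine ⟨q, ?_, ⟨by simp [hq, hok2.1], ?_, ?_⟩, ?_, ?_⟩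
    · show ufUnion p (x : Int) (y : Int) = q
      unfold ufUnion
      rw [e1]
      simp only [e2, hry1]
      rw [if_pos (by exact_mod_cast hcase), hq]
      simp [PySem.List.pySetD_natCast]
    · intro k hk
      by_cases hkx : k = rx
      · rw [hkx]
        have : q.getD rx 0 = ((ry : Nat) : Int) := by
          simp [hq, List.getD, show rx < p2.length from hok2.1 ▸ hrxN]
        rw [this]
        exact ⟨by positivity, by exact_mod_cast hryN⟩
      · have : q.getD k 0 = p2.getD k 0 := by
          simp [hq, List.getD, List.getElem?_set_ne (Ne.symm hkx)]
        rw [this]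
        exact hok2.2.1 k hk
    · intro k hk
      obtain ⟨dk, hdk⟩ := hok2.2.2 k hk
      rw [hpvq]
      exact union_rch hfrx2 hfry2 hcase dk k hdk
    · intro k hk
      rw [hpvq]
      by_cases hkx : k = rx
      · rw [hkx, Function.update_self]
        exact hCrxry
      · rw [Function.update_of_ne hkx]
        exact hcomp2 k hk
    · intro z hz
      obtain ⟨dz, hdz⟩ := hok2.2.2 z hz
      rw [hpvq, union_root (ufok_cl hok2) hok2.2.2 hrxN hryN hfrx2 hfry2 hcase dz z hz hdz,
        hroots12 z hz]

-- the list of directed edges (i, aut[i]) the two programs both traverse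
def edgesOf (N : Nat) (auts : List (List Int)) : List (Int × Int) :=
  auts.flatMap (fun aut => (List.range N).map (fun (i : Nat) => (((i : Nat) : Int), PySem.List.pyGetD aut ((i : Nat) : Int) 0)))

def EdgeR (N : Nat) (auts : List (List Int)) (a b : Nat) : Prop :=
  ((a : Int), (b : Int)) ∈ edgesOf N auts

-- connectivity: the equivalence relation generated by the edges
def Conn (N : Nat) (auts : List (List Int)) : Nat → Nat → Prop :=
  Relation.EqvGen (EdgeR N auts)

theorem conn_refl (N : Nat) (auts : List (List Int)) (a : Nat) : Conn N auts a a :=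
  Relation.EqvGen.refl a

theorem conn_symm {N : Nat} {auts : List (List Int)} {a b : Nat} (h : Conn N auts a b) :
    Conn N auts b a := Relation.EqvGen.symm _ _ h

theorem conn_trans {N : Nat} {auts : List (List Int)} {a b c : Nat}
    (h1 : Conn N auts a b) (h2 : Conn N auts b c) : Conn N auts a c :=
  Relation.EqvGen.trans _ _ _ h1 h2

-- the nested loop over automorphisms and range(n) is a fold over edgesOf
theorem nested_fold_eq_edges {α : Type} (N : Nat) (auts : List (List Int))
    (step : α → Int → Int → α) (init : α) :
    auts.foldl (fun p aut => (List.range N).foldl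
      (fun p k => step p ((k : Nat) : Int) (PySem.List.pyGetD aut ((k : Nat) : Int) 0)) p) init
    = (edgesOf N auts).foldl (fun p e => step p e.1 e.2) init := by
  induction auts generalizing init with
  | nil => rfl
  | cons aut rest ih =>
    rw [List.foldl_cons, ih]
    have hsplit : edgesOf N (aut :: rest) =
        (List.range N).map (fun i => (((i : Nat) : Int), PySem.List.pyGetD aut ((i : Nat) : Int) 0))
          ++ edgesOf N rest := by
      simp [edgesOf]
    rw [hsplit, List.foldl_append, List.foldl_map]

-- the union fold: joins every listed edge, preserves existing joins
theorem fold_union_inv {N : Nat} {C : Nat → Nat → Prop}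
    (hrefl : ∀ y, y < N → C y y) (hsymm : ∀ {a b}, C a b → C b a)
    (htrans : ∀ {a b c}, C a b → C b c → C a c) :
    ∀ (l : List (Int × Int)) (p : List Int),
      (∀ e ∈ l, ∃ a b : Nat, e = ((a : Int), (b : Int)) ∧ a < N ∧ b < N ∧ C a b) →
      UFok N p → CompatL N C p →
      UFok N (l.foldl (fun p e => ufUnion p e.1 e.2) p) ∧
      CompatL N C (l.foldl (fun p e => ufUnion p e.1 e.2) p) ∧
      (∀ e ∈ l, ∀ a b : Nat, e = ((a : Int), (b : Int)) →
        rootF N (pvF (l.foldl (fun p e => ufUnion p e.1 e.2) p)) a =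
        rootF N (pvF (l.foldl (fun p e => ufUnion p e.1 e.2) p)) b) ∧
      (∀ a b : Nat, a < N → b < N →
        rootF N (pvF p) a = rootF N (pvF p) b →
        rootF N (pvF (l.foldl (fun p e => ufUnion p e.1 e.2) p)) a =
        rootF N (pvF (l.foldl (fun p e => ufUnion p e.1 e.2) p)) b) := by
  intro l
  induction l with
  | nil =>
    intro p _ hok hcomp
    exact ⟨hok, hcomp, by simp, fun a b _ _ h => h⟩
  | cons e l ih =>
    intro p hmem hok hcomp
    obtain ⟨a, b, he, haN, hbN, hCab⟩ := hmem e (by simp)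
    obtain ⟨p2, heq, hok2, hcomp2, hform⟩ :=
      uf_union_spec hrefl hsymm htrans p a b hok hcomp haN hbN hCab
    have hstep : (e :: l).foldl (fun p e => ufUnion p e.1 e.2) p =
        l.foldl (fun p e => ufUnion p e.1 e.2) p2 := by
      simp only [List.foldl_cons, he]
      rw [heq]
    obtain ⟨hokF, hcompF, hmemF, hrefF⟩ :=
      ih p2 (fun e' he' => hmem e' (by simp [he'])) hok2 hcomp2
    have hab2 : rootF N (pvF p2) a = rootF N (pvF p2) b := by
      rw [hform a haN, hform b hbN, if_pos rfl]
      split_ifs with h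
      · rw [h]
      · rfl
    refine ⟨hstep ▸ hokF, hstep ▸ hcompF, ?_, ?_⟩
    · intro e' he' a' b' he'eq
      rw [hstep]
      rcases List.mem_cons.mp he' with h | h
      · -- the head edge: a' = a, b' = b by cast injectivity
        have : ((a' : Int), (b' : Int)) = ((a : Int), (b : Int)) := by rw [← he'eq, h, he]
        obtain ⟨h1, h2⟩ := Prod.mk.inj this
        have ha' : a' = a := by exact_mod_cast h1
        have hb' : b' = b := by exact_mod_cast h2
        rw [ha', hb']
        exact hrefF a b haN hbN hab2
      · exact hmemF e' h a' b' he'eq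
    · intro a' b' ha' hb' hroot
      rw [hstep]
      apply hrefF a' b' ha' hb'
      rw [hform a' ha', hform b' hb', hroot]

-- first occurrences (class representatives) among 0..m-1, and class member lists
def repsL (key : Nat → Nat) (m : Nat) : List Nat :=
  (List.range m).filter (fun j => decide (∀ l, l < j → key l ≠ key j))

def classM (key : Nat → Nat) (m r : Nat) : List Int :=
  ((List.range m).filter (fun j => key j == key r)).map (fun (j : Nat) => ((j : Nat) : Int))

theorem mem_repsL {key : Nat → Nat} {m r : Nat} :
    r ∈ repsL key m ↔ r < m ∧ ∀ l, l < r → key l ≠ key r := by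
  simp [repsL, List.mem_filter, List.mem_range, and_comm]

theorem repsL_exists {key : Nat → Nat} {m : Nat} :
    ∀ l, l < m → ∃ r ∈ repsL key m, key r = key l := by
  intro l
  induction l using Nat.strong_induction_on with
  | _ l ih =>
    intro hl
    by_cases hrep : ∀ l', l' < l → key l' ≠ key l
    · exact ⟨l, mem_repsL.mpr ⟨hl, hrep⟩, rfl⟩
    · push Not at hrep
      obtain ⟨l', hl', hk⟩ := hrep
      obtain ⟨r, hr, hkr⟩ := ih l' hl' (by omega)
      exact ⟨r, hr, by rw [hkr, hk]⟩

theorem repsL_inj {key : Nat → Nat} {m r1 r2 : Nat} (h1 : r1 ∈ repsL key m)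
    (h2 : r2 ∈ repsL key m) (hk : key r1 = key r2) : r1 = r2 := by
  rcases Nat.lt_trichotomy r1 r2 with h | h | h
  · exact absurd hk ((mem_repsL.mp h2).2 r1 h)
  · exact h
  · exact absurd hk.symm ((mem_repsL.mp h1).2 r2 h)

theorem repsL_succ_fresh {key : Nat → Nat} {m : Nat} (h : ∀ l, l < m → key l ≠ key m) :
    repsL key (m+1) = repsL key m ++ [m] := by
  unfold repsL
  rw [List.range_succ, List.filter_append]
  congr 1
  rw [List.filter_singleton, decide_eq_true h]
  rfl

theorem repsL_succ_stale {key : Nat → Nat} {m : Nat} (h : ¬ ∀ l, l < m → key l ≠ key m) :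
    repsL key (m+1) = repsL key m := by
  unfold repsL
  rw [List.range_succ, List.filter_append]
  have : (List.filter (fun j => decide (∀ l, l < j → key l ≠ key j)) [m]) = [] := by
    rw [List.filter_singleton, decide_eq_false h]
    rfl
  rw [this, List.append_nil]

theorem classM_succ_ne {key : Nat → Nat} {m r : Nat} (h : key m ≠ key r) :
    classM key (m+1) r = classM key m r := by
  unfold classM
  rw [List.range_succ, List.filter_append]
  have : (List.filter (fun j => key j == key r) [m]) = [] := by simp [h]
  rw [this, List.append_nil]

theorem classM_succ_eq {key : Nat → Nat} {m r : Nat} (h : key m = key r) :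
    classM key (m+1) r = classM key m r ++ [(m : Int)] := by
  unfold classM
  rw [List.range_succ, List.filter_append]
  have : (List.filter (fun j => key j == key r) [m]) = [m] := by simp [h]
  rw [this, List.map_append]
  rfl

theorem classM_self_empty {key : Nat → Nat} {m : Nat} (h : ∀ l, l < m → key l ≠ key m) :
    classM key m m = [] := by
  unfold classM
  have : (List.range m).filter (fun j => key j == key m) = [] := by
    apply List.filter_eq_nil_iff.mpr
    intro j hj
    simpa using h j (List.mem_range.mp hj)
  rw [this]
  rfl

theorem classM_mem_lt {key : Nat → Nat} {m r : Nat} {x : Int} (h : x ∈ classM key m r) :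
    ∃ j : Nat, j < m ∧ x = (j : Int) := by
  unfold classM at h
  obtain ⟨j, hj, rfl⟩ := List.mem_map.mp h
  exact ⟨j, List.mem_range.mp (List.mem_filter.mp hj).1, rfl⟩

theorem find?_unique {α : Type} (q : α → Bool) (l : List α) (r0 : α) (hmem : r0 ∈ l)
    (hq : q r0 = true) (huniq : ∀ r ∈ l, q r = true → r = r0) : l.find? q = some r0 := by
  induction l with
  | nil => simp at hmem
  | cons a l ih =>
    by_cases ha : q a = true
    · have : a = r0 := huniq a (by simp) ha
      rw [List.find?_cons_of_pos ha, this]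
    · rw [List.find?_cons_of_neg ha]
      rcases List.mem_cons.mp hmem with h | h
      · exact absurd (h ▸ hq) ha
      · exact ih h (fun r hr => huniq r (by simp [hr]))

-- one step of A's orbit-collection loop on an explicit dict
theorem dict_step {key : Nat → Nat} {m : Nat} :
    PySem.Dict.modify
      (PySem.Dict.mk ((repsL key m).map (fun r => (((key r : Nat) : Int), classM key m r))))
      ((key m : Nat) : Int) PySem.Set.empty (fun t => PySem.Set.add t ((m : Nat) : Int)) =
    PySem.Dict.mk ((repsL key (m+1)).map (fun r => (((key r : Nat) : Int), classM key (m+1) r))) := by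
  by_cases hfresh : ∀ l, l < m → key l ≠ key m
  · -- key m is new: the entry is appended
    have hcont : (PySem.Dict.mk ((repsL key m).map
        (fun r => (((key r : Nat) : Int), classM key m r)))).contains ((key m : Nat) : Int) = false := by
      simp only [PySem.Dict.contains]
      rw [List.any_eq_false]
      intro pr hpr
      obtain ⟨r, hr, rfl⟩ := List.mem_map.mp hpr
      intro h
      simp only [beq_iff_eq, Nat.cast_inj] at h
      exact hfresh r (mem_repsL.mp hr).1 h
    have hfind : ((repsL key m).map (fun r => (((key r : Nat) : Int), classM key m r))).find?
        (fun p => p.1 == ((key m : Nat) : Int)) = none := by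
      rw [List.find?_eq_none]
      intro pr hpr
      obtain ⟨r, hr, rfl⟩ := List.mem_map.mp hpr
      intro h
      simp only [beq_iff_eq, Nat.cast_inj] at h
      exact hfresh r (mem_repsL.mp hr).1 h
    have hget : (PySem.Dict.mk ((repsL key m).map
        (fun r => (((key r : Nat) : Int), classM key m r)))).getD ((key m : Nat) : Int)
          PySem.Set.empty = PySem.Set.empty := by
      simp only [PySem.Dict.getD, PySem.Dict.get?, hfind]
      rfl
    simp only [PySem.Dict.modify, PySem.Dict.insert, hcont, Bool.false_eq_true, if_false, hget]
    have hadd : PySem.Set.add PySem.Set.empty ((m : Nat) : Int) = [((m : Nat) : Int)] := rfl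
    rw [hadd, repsL_succ_fresh hfresh, List.map_append]
    have htail : [m].map (fun r => (((key r : Nat) : Int), classM key (m+1) r)) =
        [(((key m : Nat) : Int), [((m : Nat) : Int)])] := by
      simp only [List.map_cons, List.map_nil]
      rw [classM_succ_eq rfl, classM_self_empty hfresh]
      rfl
    have hmain : (repsL key m).map (fun r => (((key r : Nat) : Int), classM key (m+1) r)) =
        (repsL key m).map (fun r => (((key r : Nat) : Int), classM key m r)) := by
      apply List.map_congr_left
      intro r hr
      rw [classM_succ_ne (fun h => hfresh r (mem_repsL.mp hr).1 h.symm)]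
    rw [htail, hmain]
  · -- key m already present: its class entry is extended in place
    push Not at hfresh
    obtain ⟨l0, hl0, hkl0⟩ := hfresh
    obtain ⟨r0, hr0, hkr0⟩ := repsL_exists l0 hl0
    have hkr0m : key r0 = key m := hkr0.trans hkl0
    have hcont : (PySem.Dict.mk ((repsL key m).map
        (fun r => (((key r : Nat) : Int), classM key m r)))).contains ((key m : Nat) : Int) = true := by
      simp only [PySem.Dict.contains, List.any_eq_true]
      exact ⟨(((key r0 : Nat) : Int), classM key m r0), List.mem_map.mpr ⟨r0, hr0, rfl⟩,
        by simp [hkr0m]⟩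
    have hfind : ((repsL key m).map (fun r => (((key r : Nat) : Int), classM key m r))).find?
        (fun p => p.1 == ((key m : Nat) : Int)) =
        some (((key r0 : Nat) : Int), classM key m r0) := by
      apply find?_unique _ _ _ (List.mem_map.mpr ⟨r0, hr0, rfl⟩) (by simp [hkr0m])
      intro pr hpr hq
      obtain ⟨r, hr, rfl⟩ := List.mem_map.mp hpr
      simp only [beq_iff_eq, Nat.cast_inj] at hq
      have : r = r0 := repsL_inj hr hr0 (by rw [hq, hkr0m])
      rw [this]
    have hget : (PySem.Dict.mk ((repsL key m).map
        (fun r => (((key r : Nat) : Int), classM key m r)))).getD ((key m : Nat) : Int)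
          PySem.Set.empty = classM key m r0 := by
      simp only [PySem.Dict.getD, PySem.Dict.get?, hfind]
      rfl
    simp only [PySem.Dict.modify, PySem.Dict.insert, hcont, if_true, hget]
    have hnotmem : PySem.Set.contains (classM key m r0) ((m : Nat) : Int) = false := by
      simp only [PySem.Set.contains, List.contains_eq_mem, decide_eq_false_iff_not]
      intro hmem
      obtain ⟨j, hj, hje⟩ := classM_mem_lt hmem
      have : m = j := by exact_mod_cast hje
      omega
    have hadd : PySem.Set.add (classM key m r0) ((m : Nat) : Int) =
        classM key m r0 ++ [((m : Nat) : Int)] := by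
      unfold PySem.Set.add
      rw [hnotmem]
      simp
    rw [hadd]
    rw [repsL_succ_stale (by push Not; exact ⟨l0, hl0, hkl0⟩)]
    simp only [List.map_map]
    congr 1
    apply List.map_congr_left
    intro r hr
    simp only [Function.comp_apply]
    by_cases hrr : key r = key m
    · have hre : r = r0 := repsL_inj hr hr0 (hrr.trans hkr0m.symm)
      rw [if_pos (by simp [hrr])]
      rw [hre, classM_succ_eq hkr0m.symm]
      have hc : ((key m : Nat) : Int) = ((key r0 : Nat) : Int) := by rw [hkr0m]
      rw [hc]
    · rw [if_neg (by simp [hrr])]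
      rw [classM_succ_ne (fun h => hrr h.symm)]

-- A's whole orbit-collection loop
theorem A_orbit_loop {N : Nat} {C : Nat → Nat → Prop}
    (hrefl : ∀ y, y < N → C y y) (htrans : ∀ {a b c}, C a b → C b c → C a c)
    (key : Nat → Nat) (p1 : List Int) (hok1 : UFok N p1) (hcomp1 : CompatL N C p1)
    (hkey : ∀ y, y < N → rootF N (pvF p1) y = key y) :
    ∀ m, m ≤ N →
      ∃ q, (List.range m).foldl (fun st (k : Nat) =>
          ((ufFindTop st.1 ((k : Nat) : Int)).1,
            PySem.Dict.modify st.2 (ufFindTop st.1 ((k : Nat) : Int)).2 PySem.Set.empty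
              (fun t => PySem.Set.add t ((k : Nat) : Int))))
          (p1, PySem.Dict.empty) =
        (q, PySem.Dict.mk ((repsL key m).map (fun r => (((key r : Nat) : Int), classM key m r)))) ∧
        UFok N q ∧ CompatL N C q ∧ (∀ y, y < N → rootF N (pvF q) y = key y) := by
  intro m
  induction m with
  | zero =>
    intro _
    exact ⟨p1, rfl, hok1, hcomp1, hkey⟩
  | succ m ih =>
    intro hm
    obtain ⟨q, hq, hokq, hcompq, hkeyq⟩ := ih (by omega)
    obtain ⟨q', he', hokq', hcompq', hroots', _⟩ :=
      uf_findTop_spec hrefl htrans q m hokq hcompq (by omega)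
    refine ⟨q', ?_, hokq', hcompq', fun y hy => (hroots' y hy).trans (hkeyq y hy)⟩
    rw [List.range_succ, List.foldl_append, hq]
    simp only [List.foldl_cons, List.foldl_nil, he', hkeyq m (by omega)]
    rw [dict_step]

-- characterization of A's output: classes of first-occurrence representatives
theorem A_characterization (n : Int) (auts : List (List Int)) (N : Nat) (hn : n = (N : Int))
    (hE : ∀ e ∈ edgesOf N auts, ∃ a b : Nat, e = ((a : Int), (b : Int)) ∧ a < N ∧ b < N) :
    ∃ key : Nat → Nat,
      compute_orbits n auts = (repsL key N).map (fun r => classM key N r) ∧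
      (∀ i j, i < N → j < N → (key i = key j ↔ Conn N auts i j)) := by
  have hrange : PySem.List.pyRange 0 n 1 = (List.range N).map (fun (k : Nat) => ((k : Nat) : Int)) := by
    rw [PySem.List.pyRange_one]
    subst hn
    simp
  have hp0 : ((List.range N).map (fun (k : Nat) => ((k : Nat) : Int))) =
      (List.range N).map (fun (k : Nat) => ((k : Nat) : Int)) := rfl
  have hp0get : ∀ k, k < N → ((List.range N).map (fun (k : Nat) => ((k : Nat) : Int))).getD k 0 = (k : Int) := by
    intro k hk
    rw [List.getD_eq_getElem?_getD, List.getElem?_map, List.getElem?_range hk]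
    rfl
  have hok0 : UFok N ((List.range N).map (fun (k : Nat) => ((k : Nat) : Int))) := by
    refine ⟨by simp, ?_, ?_⟩
    · intro k hk
      rw [hp0get k hk]
      constructor
      · positivity
      · exact_mod_cast hk
    · intro k hk
      refine ⟨0, ?_⟩
      have : pvF ((List.range N).map (fun (k : Nat) => ((k : Nat) : Int))) k = k := by
        unfold pvF
        rw [hp0get k hk]
        simp
      simp [RchF, this]
  have hpv0 : ∀ k, k < N → pvF ((List.range N).map (fun (k : Nat) => ((k : Nat) : Int))) k = k := by
    intro k hk
    unfold pvF
    rw [hp0get k hk]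
    simp
  have hcomp0 : CompatL N (Conn N auts) ((List.range N).map (fun (k : Nat) => ((k : Nat) : Int))) := by
    intro k hk
    rw [hpv0 k hk]
    exact conn_refl N auts k
  have hEdgeC : ∀ e ∈ edgesOf N auts, ∃ a b : Nat, e = ((a : Int), (b : Int)) ∧ a < N ∧ b < N ∧
      Conn N auts a b := by
    intro e he
    obtain ⟨a, b, hab, haN, hbN⟩ := hE e he
    exact ⟨a, b, hab, haN, hbN, Relation.EqvGen.rel a b (by unfold EdgeR; rw [← hab]; exact he)⟩
  obtain ⟨hok1, hcomp1, hmerged, _⟩ :=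
    fold_union_inv (fun y _ => conn_refl N auts y) (fun h => conn_symm h) (fun h1 h2 => conn_trans h1 h2)
      (edgesOf N auts) ((List.range N).map (fun (k : Nat) => ((k : Nat) : Int))) hEdgeC hok0 hcomp0
  set p1 : List Int := (edgesOf N auts).foldl (fun p e => ufUnion p e.1 e.2)
    ((List.range N).map (fun (k : Nat) => ((k : Nat) : Int))) with hp1
  set key : Nat → Nat := fun y => rootF N (pvF p1) y with hkeydef
  obtain ⟨q, hloop, _, _, _⟩ :=
    A_orbit_loop (C := Conn N auts) (fun y _ => conn_refl N auts y) (fun h1 h2 => conn_trans h1 h2)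
      key p1 hok1 hcomp1 (fun y _ => rfl) N (le_refl N)
  refine ⟨key, ?_, ?_⟩
  · -- compute the program's value
    show compute_orbits n auts = _
    unfold compute_orbits
    simp only [hrange, List.foldl_map]
    rw [nested_fold_eq_edges N auts (fun p a b => ufUnion p a b)
      ((List.range N).map (fun (k : Nat) => ((k : Nat) : Int)))]
    rw [← hp1, hloop]
    simp only [PySem.Dict.values, List.map_map]
    rfl
  · intro i j hi hj
    constructor
    · intro hk
      have hci : Conn N auts i (key i) :=
        compat_iterate (fun y _ => conn_refl N auts y) (fun h1 h2 => conn_trans h1 h2) hcomp1 (ufok_cl hok1) N i hi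
      have hcj : Conn N auts j (key j) :=
        compat_iterate (fun y _ => conn_refl N auts y) (fun h1 h2 => conn_trans h1 h2) hcomp1 (ufok_cl hok1) N j hj
      exact conn_trans hci (hk ▸ conn_symm hcj)
    · intro hconn
      clear hi hj
      induction hconn with
      | rel a b hab =>
        obtain ⟨a', b', habe, ha', hb'⟩ := hE _ hab
        obtain ⟨h1, h2⟩ := Prod.mk.inj habe
        have ha2 : a = a' := by exact_mod_cast h1
        have hb2 : b = b' := by exact_mod_cast h2
        exact hmerged _ hab a b (by rw [ha2, hb2])
      | refl a => rfl
      | symm a b _ ih => exact ih.symm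
      | trans a b c _ _ ih1 ih2 => exact ih1.trans ih2

-- minimal element of a connectivity class
noncomputable def minrep (N : Nat) (auts : List (List Int)) (i : Nat) : Nat :=
  sInf {j | Conn N auts j i}

theorem minrep_conn (N : Nat) (auts : List (List Int)) (i : Nat) :
    Conn N auts (minrep N auts i) i :=
  Nat.sInf_mem (⟨i, conn_refl N auts i⟩ : Set.Nonempty {j | Conn N auts j i})

theorem minrep_le (N : Nat) (auts : List (List Int)) (i : Nat) : minrep N auts i ≤ i :=
  Nat.sInf_le (conn_refl N auts i)

theorem minrep_min {N : Nat} {auts : List (List Int)} {i j : Nat} (h : Conn N auts j i) :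
    minrep N auts i ≤ j :=
  Nat.sInf_le h

theorem minrep_conn_eq {N : Nat} {auts : List (List Int)} {i j : Nat} (h : Conn N auts i j) :
    minrep N auts i = minrep N auts j := by
  unfold minrep
  congr 1
  ext x
  exact ⟨fun hx => conn_trans hx h, fun hx => conn_trans hx (conn_symm h)⟩

theorem minrep_idem (N : Nat) (auts : List (List Int)) (i : Nat) :
    minrep N auts (minrep N auts i) = minrep N auts i :=
  minrep_conn_eq (minrep_conn N auts i)

theorem minrep_eq_self_iff {N : Nat} {auts : List (List Int)} {x : Nat} :
    minrep N auts x = x ↔ ∀ l, l < x → ¬ Conn N auts l x := by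
  constructor
  · intro h l hl hc
    have := minrep_min hc
    omega
  · intro h
    have h1 := minrep_le N auts x
    rcases Nat.lt_or_ge (minrep N auts x) x with hlt | _
    · exact absurd (minrep_conn N auts x) (h _ hlt)
    · omega

noncomputable def countMin (N : Nat) (auts : List (List Int)) (m : Nat) : Nat :=
  (List.range m).countP (fun x => decide (minrep N auts x = x))

theorem countMin_succ (N : Nat) (auts : List (List Int)) (m : Nat) :
    countMin N auts (m+1) =
      countMin N auts m + (if minrep N auts m = m then 1 else 0) := by
  unfold countMin
  rw [List.range_succ, List.countP_append]
  congr 1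
  by_cases h : minrep N auts m = m <;> simp [h]

theorem countMin_mono (N : Nat) (auts : List (List Int)) {m m' : Nat} (h : m ≤ m') :
    countMin N auts m ≤ countMin N auts m' := by
  induction m', h using Nat.le_induction with
  | base => exact le_refl _
  | succ k hk ih =>
    rw [countMin_succ]
    split_ifs <;> omega

theorem countMin_strict {N : Nat} {auts : List (List Int)} {r m : Nat} (hrm : r < m)
    (hr : minrep N auts r = r) : countMin N auts r < countMin N auts m := by
  have h1 : countMin N auts (r+1) = countMin N auts r + 1 := by
    rw [countMin_succ, if_pos hr]
  have h2 := countMin_mono N auts (show r + 1 ≤ m by omega)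
  omega

theorem countMin_inj {N : Nat} {auts : List (List Int)} {r1 r2 : Nat}
    (h1 : minrep N auts r1 = r1) (h2 : minrep N auts r2 = r2)
    (h : countMin N auts r1 = countMin N auts r2) : r1 = r2 := by
  rcases Nat.lt_trichotomy r1 r2 with hlt | he | hlt
  · have := countMin_strict hlt h1
    omega
  · exact he
  · have := countMin_strict hlt h2
    omega

-- enumeration of a filtered range by the running count
theorem filter_map_countP (p : Nat → Bool) :
    ∀ m, ((List.range m).filter p).map (fun x => (List.range x).countP p) =
      List.range ((List.range m).countP p) := by
  intro m
  induction m with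
  | zero => rfl
  | succ m ih =>
    rw [List.range_succ, List.filter_append, List.countP_append, List.map_append, ih]
    by_cases h : p m
    · rw [List.filter_singleton, h]
      simp only [cond_true, List.map_cons, List.map_nil]
      rw [List.countP_singleton, h, if_pos rfl, List.range_succ]
    · have hb : p m = false := by simpa using h
      rw [List.filter_singleton, hb]
      simp only [cond_false, List.map_nil, List.append_nil]
      rw [List.countP_singleton, hb]
      simp

theorem getDl_set_self {α : Type} (l : List α) (i : Nat) (v d : α) (h : i < l.length) :
    (l.set i v).getD i d = v := by
  simp [List.getD, h]

theorem getDl_set_ne {α : Type} (l : List α) (i k : Nat) (v d : α) (h : k ≠ i) :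
    (l.set i v).getD k d = l.getD k d := by
  simp [List.getD, List.getElem?_set_ne (Ne.symm h)]

-- soundness of an adjacency list w.r.t. connectivity
def AdjOk (N : Nat) (auts : List (List Int)) (adj : List (List Int)) : Prop :=
  adj.length = N ∧
  (∀ a, a < N → ∀ v ∈ adj.getD a [], ∃ b, b < N ∧ v = ((b : Nat) : Int) ∧ Conn N auts a b)

-- inserting one undirected edge into the adjacency structure
theorem adj_step {N : Nat} {auts : List (List Int)} {adj : List (List Int)}
    (hok : AdjOk N auts adj) {a b : Nat} (ha : a < N) (hb : b < N) (hC : Conn N auts a b) :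
    let adj2 := PySem.List.pySetD
      (PySem.List.pySetD adj ((a : Nat) : Int)
        (PySem.List.pyGetD adj ((a : Nat) : Int) [] ++ [((b : Nat) : Int)]))
      ((b : Nat) : Int)
      (PySem.List.pyGetD
        (PySem.List.pySetD adj ((a : Nat) : Int)
          (PySem.List.pyGetD adj ((a : Nat) : Int) [] ++ [((b : Nat) : Int)]))
        ((b : Nat) : Int) [] ++ [((a : Nat) : Int)])
    AdjOk N auts adj2 ∧
    (∀ c, c < N → ∀ v ∈ adj.getD c [], v ∈ adj2.getD c []) ∧
    ((b : Int) ∈ adj2.getD a [] ∧ (a : Int) ∈ adj2.getD b []) := by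
  intro adj2
  have hlen : adj.length = N := hok.1
  have hset1 : PySem.List.pySetD adj ((a : Nat) : Int)
      (PySem.List.pyGetD adj ((a : Nat) : Int) [] ++ [((b : Nat) : Int)]) =
      adj.set a (adj.getD a [] ++ [((b : Nat) : Int)]) := by
    rw [PySem.List.pySetD_natCast, PySem.List.pyGetD_natCast]
  set adj1 := adj.set a (adj.getD a [] ++ [((b : Nat) : Int)]) with hadj1
  have hadj2 : adj2 = adj1.set b (adj1.getD b [] ++ [((a : Nat) : Int)]) := by
    show PySem.List.pySetD _ _ _ = _
    rw [hset1, PySem.List.pySetD_natCast, PySem.List.pyGetD_natCast]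
  have hlen1 : adj1.length = N := by rw [hadj1, List.length_set, hlen]
  have hlen2 : adj2.length = N := by rw [hadj2, List.length_set, hlen1]
  -- membership description of adj2.getD c
  have hmem2 : ∀ c, c < N → ∀ v, v ∈ adj2.getD c [] ↔
      (v ∈ adj.getD c [] ∨ (c = a ∧ v = ((b : Nat) : Int)) ∨ (c = b ∧ v = ((a : Nat) : Int))) := by
    intro c hc v
    by_cases hcb : c = b
    · subst hcb
      rw [hadj2, getDl_set_self _ _ _ _ (by omega), List.mem_append]
      by_cases hca : c = a
      · subst hca
        rw [hadj1, getDl_set_self _ _ _ _ (by omega), List.mem_append]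
        simp only [List.mem_append, List.mem_singleton]
        tauto
      · rw [hadj1, getDl_set_ne _ _ _ _ _ hca]
        simp only [List.mem_append, List.mem_singleton]
        tauto
    · rw [hadj2, getDl_set_ne _ _ _ _ _ hcb]
      by_cases hca : c = a
      · subst hca
        rw [hadj1, getDl_set_self _ _ _ _ (by omega), List.mem_append]
        simp only [List.mem_append, List.mem_singleton]
        tauto
      · rw [hadj1, getDl_set_ne _ _ _ _ _ hca]
        tauto
  refine ⟨⟨hlen2, ?_⟩, ?_, ?_⟩
  · intro c hc v hv
    rcases (hmem2 c hc v).mp hv with h | ⟨rfl, rfl⟩ | ⟨rfl, rfl⟩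
    · exact hok.2 c hc v h
    · exact ⟨b, hb, rfl, hC⟩
    · exact ⟨a, ha, rfl, conn_symm hC⟩
  · intro c hc v hv
    exact (hmem2 c hc v).mpr (Or.inl hv)
  · exact ⟨(hmem2 a ha _).mpr (Or.inr (Or.inl ⟨rfl, rfl⟩)),
      (hmem2 b hb _).mpr (Or.inr (Or.inr ⟨rfl, rfl⟩))⟩

-- the adjacency-building fold
theorem fold_adj_inv {N : Nat} {auts : List (List Int)} :
    ∀ (l : List (Int × Int)) (adj : List (List Int)),
      (∀ e ∈ l, ∃ a b : Nat, e = ((a : Int), (b : Int)) ∧ a < N ∧ b < N ∧ Conn N auts a b) →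
      AdjOk N auts adj →
      AdjOk N auts (l.foldl (fun adj e =>
        PySem.List.pySetD
          (PySem.List.pySetD adj e.1 (PySem.List.pyGetD adj e.1 [] ++ [e.2])) e.2
          (PySem.List.pyGetD
            (PySem.List.pySetD adj e.1 (PySem.List.pyGetD adj e.1 [] ++ [e.2])) e.2 [] ++ [e.1])) adj) ∧
      (∀ c, c < N → ∀ v ∈ adj.getD c [],
        v ∈ (l.foldl (fun adj e =>
          PySem.List.pySetD
            (PySem.List.pySetD adj e.1 (PySem.List.pyGetD adj e.1 [] ++ [e.2])) e.2
            (PySem.List.pyGetD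
              (PySem.List.pySetD adj e.1 (PySem.List.pyGetD adj e.1 [] ++ [e.2])) e.2 [] ++ [e.1])) adj).getD c []) ∧
      (∀ e ∈ l, ∀ a b : Nat, e = ((a : Int), (b : Int)) →
        ((b : Int) ∈ (l.foldl (fun adj e =>
          PySem.List.pySetD
            (PySem.List.pySetD adj e.1 (PySem.List.pyGetD adj e.1 [] ++ [e.2])) e.2
            (PySem.List.pyGetD
              (PySem.List.pySetD adj e.1 (PySem.List.pyGetD adj e.1 [] ++ [e.2])) e.2 [] ++ [e.1])) adj).getD a [] ∧
         (a : Int) ∈ (l.foldl (fun adj e =>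
          PySem.List.pySetD
            (PySem.List.pySetD adj e.1 (PySem.List.pyGetD adj e.1 [] ++ [e.2])) e.2
            (PySem.List.pyGetD
              (PySem.List.pySetD adj e.1 (PySem.List.pyGetD adj e.1 [] ++ [e.2])) e.2 [] ++ [e.1])) adj).getD b [])) := by
  intro l
  induction l with
  | nil =>
    intro adj _ hok
    exact ⟨hok, fun c _ v hv => hv, by simp⟩
  | cons e l ih =>
    intro adj hmem hok
    obtain ⟨a, b, he, haN, hbN, hC⟩ := hmem e (by simp)
    have hstep := adj_step hok haN hbN hC
    obtain ⟨hok2, hsup2, hcur2⟩ := hstep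
    have hfold : ∀ (z : List (List Int)),
        (e :: l).foldl (fun adj e =>
          PySem.List.pySetD
            (PySem.List.pySetD adj e.1 (PySem.List.pyGetD adj e.1 [] ++ [e.2])) e.2
            (PySem.List.pyGetD
              (PySem.List.pySetD adj e.1 (PySem.List.pyGetD adj e.1 [] ++ [e.2])) e.2 [] ++ [e.1])) adj =
        l.foldl (fun adj e =>
          PySem.List.pySetD
            (PySem.List.pySetD adj e.1 (PySem.List.pyGetD adj e.1 [] ++ [e.2])) e.2
            (PySem.List.pyGetD
              (PySem.List.pySetD adj e.1 (PySem.List.pyGetD adj e.1 [] ++ [e.2])) e.2 [] ++ [e.1]))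
          (PySem.List.pySetD
            (PySem.List.pySetD adj e.1 (PySem.List.pyGetD adj e.1 [] ++ [e.2])) e.2
            (PySem.List.pyGetD
              (PySem.List.pySetD adj e.1 (PySem.List.pyGetD adj e.1 [] ++ [e.2])) e.2 [] ++ [e.1])) := by
      intro z
      rfl
    rw [hfold adj]
    have hestep : (PySem.List.pySetD
        (PySem.List.pySetD adj e.1 (PySem.List.pyGetD adj e.1 [] ++ [e.2])) e.2
        (PySem.List.pyGetD
          (PySem.List.pySetD adj e.1 (PySem.List.pyGetD adj e.1 [] ++ [e.2])) e.2 [] ++ [e.1])) =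
        (PySem.List.pySetD
          (PySem.List.pySetD adj ((a : Nat) : Int)
            (PySem.List.pyGetD adj ((a : Nat) : Int) [] ++ [((b : Nat) : Int)]))
          ((b : Nat) : Int)
          (PySem.List.pyGetD
            (PySem.List.pySetD adj ((a : Nat) : Int)
              (PySem.List.pyGetD adj ((a : Nat) : Int) [] ++ [((b : Nat) : Int)]))
            ((b : Nat) : Int) [] ++ [((a : Nat) : Int)])) := by
      rw [he]
    rw [hestep]
    obtain ⟨hokF, hsupF, hmemF⟩ := ih _ (fun e' he' => hmem e' (by simp [he'])) hok2
    refine ⟨hokF, ?_, ?_⟩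
    · intro c hc v hv
      exact hsupF c hc v (hsup2 c hc v hv)
    · intro e' he' a' b' he'eq
      rcases List.mem_cons.mp he' with h | h
      · have : ((a' : Int), (b' : Int)) = ((a : Int), (b : Int)) := by rw [← he'eq, h, he]
        obtain ⟨h1, h2⟩ := Prod.mk.inj this
        have ha2 : a' = a := by exact_mod_cast h1
        have hb2 : b' = b := by exact_mod_cast h2
        subst ha2; subst hb2
        exact ⟨hsupF a' haN _ hcur2.1, hsupF b' hbN _ hcur2.2⟩
      · exact hmemF e' h a' b' he'eq

def countNeg (N : Nat) (comp : List Int) : Nat :=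
  (List.range N).countP (fun k => comp.getD k 0 == -1)

theorem countP_update (f g : Nat → Bool) :
    ∀ N b, b < N → (∀ k, k ≠ b → f k = g k) → f b = true → g b = false →
      (List.range N).countP f = (List.range N).countP g + 1 := by
  intro N
  induction N with
  | zero => omega
  | succ N ih =>
    intro b hb hk hf hg
    rw [List.range_succ, List.countP_append, List.countP_append,
      List.countP_singleton, List.countP_singleton]
    by_cases hbe : b = N
    · subst hbe
      have : (List.range b).countP f = (List.range b).countP g := by
        apply List.countP_congr
        intro k hkk
        rw [hk k (by have := List.mem_range.mp hkk; omega)]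
      rw [this, hf, hg]
      simp
    · have hlt : b < N := by omega
      rw [ih b hlt hk hf hg, hk N (by omega)]
      omega

theorem countNeg_set {N : Nat} {comp : List Int} {b : Nat} {c : Int} (hb : b < N)
    (hlen : comp.length = N) (hneg : comp.getD b 0 = -1) (hc : c ≠ -1) :
    countNeg N comp = countNeg N (comp.set b c) + 1 := by
  unfold countNeg
  apply countP_update _ _ N b hb
  · intro k hk
    rw [getDl_set_ne _ _ _ _ _ hk]
  · simp only [beq_iff_eq]
    exact hneg
  · rw [getDl_set_self _ _ _ _ (by omega)]
    simpa using hc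

theorem dfs_inner {N : Nat} {c : Int} (hc : c ≠ -1) :
    ∀ (ys : List Int) (comp stack : List Int),
      comp.length = N →
      (∀ v ∈ ys, ∃ b : Nat, b < N ∧ v = ((b : Nat) : Int)) →
      ∃ comp2 stack2,
        ys.foldl (fun (st : List Int × List Int) y =>
          if PySem.List.pyGetD st.1 y 0 = -1 then (PySem.List.pySetD st.1 y c, st.2 ++ [y]) else st)
          (comp, stack) = (comp2, stack2) ∧
        comp2.length = N ∧
        (∀ k : Nat, k < N → comp2.getD k 0 =
          (if ((k : Nat) : Int) ∈ ys ∧ comp.getD k 0 = -1 then c else comp.getD k 0)) ∧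
        (∀ z, z ∈ stack2 ↔ z ∈ stack ∨
          (z ∈ ys ∧ ∃ b : Nat, b < N ∧ z = ((b : Nat) : Int) ∧ comp.getD b 0 = -1)) ∧
        countNeg N comp2 + stack2.length = countNeg N comp + stack.length := by
  intro ys
  induction ys with
  | nil =>
    intro comp stack hlen _
    exact ⟨comp, stack, rfl, hlen, by simp, by simp, rfl⟩
  | cons y ys ih =>
    intro comp stack hlen hys
    obtain ⟨b, hbN, rfl⟩ := hys y (by simp)
    have hget : PySem.List.pyGetD comp ((b : Nat) : Int) 0 = comp.getD b 0 := by
      simp [PySem.List.pyGetD_natCast]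
    by_cases hneg : comp.getD b 0 = -1
    · -- y is unlabeled: label it and push it
      have hstep : (if PySem.List.pyGetD (comp, stack).1 ((b : Nat) : Int) 0 = -1
          then (PySem.List.pySetD (comp, stack).1 ((b : Nat) : Int) c,
            (comp, stack).2 ++ [((b : Nat) : Int)])
          else ((comp, stack) : List Int × List Int)) =
          (comp.set b c, stack ++ [((b : Nat) : Int)]) := by
        have hneg' : comp[b]?.getD 0 = -1 := by simpa [List.getD] using hneg
        simp [hget, hneg', PySem.List.pySetD_natCast]
      obtain ⟨comp2, stack2, heq, hlen2, hform, hstk, hcnt⟩ :=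
        ih (comp.set b c) (stack ++ [((b : Nat) : Int)])
          (by rw [List.length_set, hlen])
          (fun v hv => hys v (by simp [hv]))
      refine ⟨comp2, stack2, ?_, hlen2, ?_, ?_, ?_⟩
      · rw [List.foldl_cons, hstep, heq]
      · intro k hk
        rw [hform k hk]
        by_cases hkb : k = b
        · subst hkb
          rw [getDl_set_self _ _ _ _ (by omega)]
          simp only [List.getD] at hneg ⊢
          simp [hneg]
        · rw [getDl_set_ne _ _ _ _ _ hkb]
          have hcast : (((k : Nat) : Int) = ((b : Nat) : Int)) ↔ k = b := Nat.cast_inj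
          by_cases hmem : ((k : Nat) : Int) ∈ ys
          · simp [hmem, hkb, hcast]
          · simp [hmem, hkb, hcast]
      · intro z
        rw [hstk z]
        simp only [List.mem_append, List.mem_cons, List.not_mem_nil, or_false]
        constructor
        · rintro (⟨hz | hz⟩ | ⟨hzys, b', hb', rfl, hb'neg⟩)
          · exact Or.inl hz
          · exact Or.inr ⟨Or.inl hz, b, hbN, hz, hneg⟩
          · have hb'b : b' ≠ b := by
              intro h
              subst h
              rw [getDl_set_self _ _ _ _ (by omega)] at hb'neg
              exact hc hb'neg
            rw [getDl_set_ne _ _ _ _ _ hb'b] at hb'neg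
            exact Or.inr ⟨Or.inr hzys, b', hb', rfl, hb'neg⟩
        · rintro (hz | ⟨hzy | hzys, b', hb', rfl, hb'neg⟩)
          · exact Or.inl (Or.inl hz)
          · have : b' = b := by exact_mod_cast hzy
            subst this
            exact Or.inl (Or.inr rfl)
          · by_cases hb'b : b' = b
            · subst hb'b
              exact Or.inl (Or.inr rfl)
            · refine Or.inr ⟨hzys, b', hb', rfl, ?_⟩
              rw [getDl_set_ne _ _ _ _ _ hb'b]
              exact hb'neg
      · have h1 := countNeg_set hbN hlen hneg hc
        rw [hcnt, List.length_append]
        simp only [List.length_cons, List.length_nil]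
        omega
    · -- y is already labeled: nothing happens
      have hstep : (if PySem.List.pyGetD (comp, stack).1 ((b : Nat) : Int) 0 = -1
          then (PySem.List.pySetD (comp, stack).1 ((b : Nat) : Int) c,
            (comp, stack).2 ++ [((b : Nat) : Int)])
          else ((comp, stack) : List Int × List Int)) = (comp, stack) := by
        have hneg' : ¬ comp[b]?.getD 0 = -1 := by simpa [List.getD] using hneg
        simp [hget, hneg']
      obtain ⟨comp2, stack2, heq, hlen2, hform, hstk, hcnt⟩ :=
        ih comp stack hlen (fun v hv => hys v (by simp [hv]))
      refine ⟨comp2, stack2, ?_, hlen2, ?_, ?_, hcnt⟩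
      · rw [List.foldl_cons, hstep, heq]
      · intro k hk
        rw [hform k hk]
        by_cases hkb : k = b
        · subst hkb
          simp only [List.getD] at hneg ⊢
          simp [hneg]
        · have hcast : (((k : Nat) : Int) = ((b : Nat) : Int)) ↔ k = b := Nat.cast_inj
          by_cases hmem : ((k : Nat) : Int) ∈ ys
          · simp [hmem]
          · simp [hmem, hkb, hcast]
      · intro z
        rw [hstk z]
        simp only [List.mem_cons]
        constructor
        · rintro (hz | ⟨hzys, b', hb', rfl, hb'neg⟩)
          · exact Or.inl hz
          · exact Or.inr ⟨Or.inr hzys, b', hb', rfl, hb'neg⟩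
        · rintro (hz | ⟨hzy | hzys, b', hb', rfl, hb'neg⟩)
          · exact Or.inl hz
          · have : b' = b := by exact_mod_cast hzy
            subst this
            exact absurd hb'neg hneg
          · exact Or.inr ⟨hzys, b', hb', rfl, hb'neg⟩

-- the DFS while-loop labels exactly the connected component of s
theorem dfs_loop_spec {N : Nat} {auts : List (List Int)} {adj : List (List Int)}
    (hadj : AdjOk N auts adj)
    (hEb : ∀ a b : Nat, EdgeR N auts a b → a < N ∧ b < N)
    (hcompl : ∀ a b : Nat, a < N → b < N → EdgeR N auts a b →
      ((b : Int) ∈ adj.getD a [] ∧ (a : Int) ∈ adj.getD b []))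
    {c : Int} (hc : c ≠ -1) {s : Nat} (hs : s < N) :
    ∀ (fuel : Nat) (comp stack : List Int),
      comp.length = N →
      comp.getD s 0 = c →
      (∀ z ∈ stack, ∃ b : Nat, b < N ∧ z = ((b : Nat) : Int) ∧ comp.getD b 0 = c) →
      (∀ k, k < N → comp.getD k 0 = c → Conn N auts s k) →
      (∀ k, k < N → comp.getD k 0 = c → ((k : Nat) : Int) ∉ stack →
        ∀ v ∈ adj.getD k [], PySem.List.pyGetD comp v 0 ≠ -1) →
      (∀ k, k < N → comp.getD k 0 ≠ -1 → comp.getD k 0 ≠ c →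
        ∀ j, j < N → Conn N auts k j → (comp.getD j 0 ≠ -1 ∧ comp.getD j 0 ≠ c)) →
      countNeg N comp + stack.length < fuel →
      ∃ compF, dfsLoop fuel adj c comp stack = compF ∧
        compF.length = N ∧
        (∀ k, k < N → (compF.getD k 0 = c ↔ Conn N auts s k)) ∧
        (∀ k, k < N → ¬ Conn N auts s k → compF.getD k 0 = comp.getD k 0) := by
  intro fuel
  induction fuel with
  | zero => intro comp stack _ _ _ _ _ _ hμ; omega
  | succ fuel ih =>
    intro comp stack hlen hcs hstk hsound hclosed hOsat hμ
    rcases List.eq_nil_or_concat stack with hnil | ⟨rest, x, hconcat⟩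
    · -- empty stack: the loop stops; the labeled set is the whole component
      subst hnil
      have hpop : PySem.List.pop? ([] : List Int) (-1) = none := rfl
      refine ⟨comp, ?_, hlen, ?_, fun k _ _ => rfl⟩
      · rw [dfsLoop, hpop]
      · intro k hk
        constructor
        · exact hsound k hk
        · intro hconn
          -- closure of the labeled set under edges
          have haux : ∀ a b, Conn N auts a b →
              ((a < N ∧ comp.getD a 0 = c) ↔ (b < N ∧ comp.getD b 0 = c)) := by
            intro a b hab
            induction hab with
            | rel a b hE =>
              obtain ⟨haN, hbN⟩ := hEb a b hE
              have hmemadj := hcompl a b haN hbN hE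
              constructor
              · rintro ⟨-, hac⟩
                refine ⟨hbN, ?_⟩
                have hnb := hclosed a haN hac (by simp) _ hmemadj.1
                rw [PySem.List.pyGetD_natCast] at hnb
                by_contra hbc
                have hbO := hOsat b hbN (by simpa [List.getD] using hnb) hbc a haN
                  (conn_symm (Relation.EqvGen.rel a b hE))
                exact hbO.2 hac
              · rintro ⟨-, hbc⟩
                refine ⟨haN, ?_⟩
                have hna := hclosed b hbN hbc (by simp) _ hmemadj.2
                rw [PySem.List.pyGetD_natCast] at hna
                by_contra hac
                have haO := hOsat a haN (by simpa [List.getD] using hna) hac b hbN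
                  (Relation.EqvGen.rel a b hE)
                exact haO.2 hbc
            | refl a => exact Iff.rfl
            | symm a b _ ihe => exact ihe.symm
            | trans a b d _ _ ih1 ih2 => exact ih1.trans ih2
          exact ((haux s k hconn).mp ⟨hs, hcs⟩).2
    · -- pop the top of the stack and scan its neighbors
      rw [List.concat_eq_append] at hconcat
      subst hconcat
      have hpop : PySem.List.pop? (rest ++ [x]) (-1) = some (x, rest) :=
        PySem.List.pop?_last rest x
      obtain ⟨a, haN, hxa, hca⟩ := hstk x (by simp)
      have hys : ∀ v ∈ adj.getD a [], ∃ b : Nat, b < N ∧ v = ((b : Nat) : Int) := by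
        intro v hv
        obtain ⟨b, hbN, hvb, _⟩ := hadj.2 a haN v hv
        exact ⟨b, hbN, hvb⟩
      have hysC : ∀ v ∈ adj.getD a [], ∃ b : Nat, b < N ∧ v = ((b : Nat) : Int) ∧
          Conn N auts a b := hadj.2 a haN
      obtain ⟨comp2, stack2, hinner, hlen2, hform, hstk2, hcnt⟩ :=
        dfs_inner hc (adj.getD a []) comp rest hlen hys
      -- facts about the new state
      have hget_adj : PySem.List.pyGetD adj x [] = adj.getD a [] := by
        rw [hxa, PySem.List.pyGetD_natCast]
      have hcs2 : comp2.getD s 0 = c := by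
        rw [hform s hs]
        split_ifs with h
        · rfl
        · exact hcs
      have hpres : ∀ k, k < N → comp.getD k 0 ≠ -1 → comp2.getD k 0 = comp.getD k 0 := by
        intro k hk hkn
        rw [hform k hk, if_neg (by tauto)]
      have hflip : ∀ k, k < N → comp2.getD k 0 ≠ comp.getD k 0 →
          (((k : Nat) : Int) ∈ adj.getD a [] ∧ comp.getD k 0 = -1 ∧ comp2.getD k 0 = c) := by
        intro k hk hne
        rw [hform k hk] at hne ⊢
        by_cases h : ((k : Nat) : Int) ∈ adj.getD a [] ∧ comp.getD k 0 = -1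
        · exact ⟨h.1, h.2, by rw [if_pos h]⟩
        · rw [if_neg h] at hne
          exact absurd rfl hne
      have hstkval : ∀ z ∈ stack2, ∃ b : Nat, b < N ∧ z = ((b : Nat) : Int) ∧
          comp2.getD b 0 = c := by
        intro z hz
        rcases (hstk2 z).mp hz with hzr | ⟨hzy, b, hbN, rfl, hbneg⟩
        · obtain ⟨b, hbN, rfl, hbc⟩ := hstk z (by simp [hzr])
          refine ⟨b, hbN, rfl, ?_⟩
          rw [hform b hbN]
          split_ifs with h
          · rfl
          · exact hbc
        · refine ⟨b, hbN, rfl, ?_⟩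
          rw [hform b hbN, if_pos ⟨hzy, hbneg⟩]
      have hsound2 : ∀ k, k < N → comp2.getD k 0 = c → Conn N auts s k := by
        intro k hk hkc
        by_cases h : comp.getD k 0 = c
        · exact hsound k hk h
        · have := hflip k hk (by rw [hkc]; exact fun he => h he.symm)
          obtain ⟨hkmem, _, _⟩ := this
          obtain ⟨b, hbN, hcast, hconn⟩ := hysC _ hkmem
          have : k = b := by exact_mod_cast hcast
          subst this
          exact conn_trans (hsound a haN hca) hconn
      have hclosed2 : ∀ k, k < N → comp2.getD k 0 = c → ((k : Nat) : Int) ∉ stack2 →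
          ∀ v ∈ adj.getD k [], PySem.List.pyGetD comp2 v 0 ≠ -1 := by
        intro k hk hkc hknstk v hv
        obtain ⟨b, hbN, rfl, -⟩ := hadj.2 k hk v hv
        rw [PySem.List.pyGetD_natCast]
        show ¬ comp2.getD b 0 = -1
        by_cases hcase : k = a
        · subst hcase
          rw [hform b hbN]
          split_ifs with h
          · exact hc
          · intro hbneg
            exact h ⟨hv, hbneg⟩
        · have hkold : comp.getD k 0 = c := by
            by_contra hkold
            have hfl := hflip k hk (by rw [hkc]; exact fun he => hkold he.symm)
            exact hknstk ((hstk2 _).mpr (Or.inr ⟨hfl.1, k, hk, rfl, hfl.2.1⟩))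
          have hknotstack : ((k : Nat) : Int) ∉ rest ++ [x] := by
            intro hmem
            rcases List.mem_append.mp hmem with hmem | hmem
            · exact hknstk ((hstk2 _).mpr (Or.inl hmem))
            · have hx2 : ((k : Nat) : Int) = x := by simpa using hmem
              rw [hxa] at hx2
              exact hcase (by exact_mod_cast hx2)
          have hold := hclosed k hk hkold hknotstack _ hv
          rw [PySem.List.pyGetD_natCast] at hold
          intro hbneg
          apply hold
          rw [hform b hbN] at hbneg
          split_ifs at hbneg with h
          · exact absurd hbneg.symm (fun he => hc he.symm)
          · exact hbneg
      have hOsat2 : ∀ k, k < N → comp2.getD k 0 ≠ -1 → comp2.getD k 0 ≠ c →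
          ∀ j, j < N → Conn N auts k j → (comp2.getD j 0 ≠ -1 ∧ comp2.getD j 0 ≠ c) := by
        intro k hk h1 h2 j hj hcj
        have hkeq : comp2.getD k 0 = comp.getD k 0 := by
          by_contra hne
          exact h2 (hflip k hk hne).2.2
        have hOld := hOsat k hk (by rw [← hkeq]; exact h1) (by rw [← hkeq]; exact h2) j hj hcj
        have hjeq : comp2.getD j 0 = comp.getD j 0 := hpres j hj hOld.1
        rw [hjeq]
        exact hOld
      have hμ2 : countNeg N comp2 + stack2.length < fuel := by
        have hlenstk : (rest ++ [x]).length = rest.length + 1 := by simp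
        omega
      obtain ⟨compF, hF, hlenF, hiffF, hunchF⟩ :=
        ih comp2 stack2 hlen2 hcs2 hstkval hsound2 hclosed2 hOsat2 hμ2
      refine ⟨compF, ?_, hlenF, hiffF, ?_⟩
      · rw [dfsLoop, hpop]
        simp only [hget_adj, hinner]
        exact hF
      · intro k hk hnc
        rw [hunchF k hk hnc]
        by_cases heq2 : comp2.getD k 0 = comp.getD k 0
        · rw [heq2]
        · exfalso
          have hfl := hflip k hk heq2
          obtain ⟨b, hbN, hcast, hconn⟩ := hysC _ hfl.1
          have hkb : k = b := by exact_mod_cast hcast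
          subst hkb
          exact hnc (conn_trans (hsound a haN hca) hconn)

theorem countNeg_lt {N : Nat} {comp : List Int} {b : Nat} (hb : b < N)
    (hbv : comp.getD b 0 ≠ -1) : countNeg N comp < N := by
  unfold countNeg
  by_contra hcon
  push Not at hcon
  have hle : (List.range N).countP (fun k => comp.getD k 0 == -1) ≤ (List.range N).length :=
    List.countP_le_length
  rw [List.length_range] at hle
  have heq : (List.range N).countP (fun k => comp.getD k 0 == -1) = (List.range N).length := by
    rw [List.length_range]
    omega
  have hall := List.countP_eq_length.mp heq
  have hbb := hall b (List.mem_range.mpr hb)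
  simp only [beq_iff_eq] at hbb
  exact hbv hbb

-- B's outer component-labeling loop
theorem B_outer_loop {N : Nat} {auts : List (List Int)} {adj : List (List Int)}
    (hadj : AdjOk N auts adj)
    (hEb : ∀ a b : Nat, EdgeR N auts a b → a < N ∧ b < N)
    (hcompl : ∀ a b : Nat, a < N → b < N → EdgeR N auts a b →
      ((b : Int) ∈ adj.getD a [] ∧ (a : Int) ∈ adj.getD b [])) :
    ∀ m, m ≤ N → ∃ comp : List Int,
      (List.range m).foldl (fun (st : List Int × Int) (k : Nat) =>
        if PySem.List.pyGetD st.1 ((k : Nat) : Int) 0 = -1 then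
          (dfsLoop (adj.length + 1) adj st.2 (PySem.List.pySetD st.1 ((k : Nat) : Int) st.2)
            [((k : Nat) : Int)], st.2 + 1)
        else st) ((List.range N).map (fun _ => (-1 : Int)), 0) =
        (comp, ((countMin N auts m : Nat) : Int)) ∧
      comp.length = N ∧
      (∀ i, i < N → comp.getD i 0 =
        (if minrep N auts i < m then ((countMin N auts (minrep N auts i) : Nat) : Int) else -1)) := by
  intro m
  induction m with
  | zero =>
    intro _
    refine ⟨(List.range N).map (fun _ => (-1 : Int)), ?_, by simp, ?_⟩
    · simp [countMin]
    · intro i hi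
      rw [if_neg (by omega)]
      rw [List.getD_eq_getElem?_getD, List.getElem?_map, List.getElem?_range hi]
      rfl
  | succ m ih =>
    intro hm
    obtain ⟨comp, hfold, hlen, hinv⟩ := ih (by omega)
    rw [List.range_succ, List.foldl_append, hfold, List.foldl_cons, List.foldl_nil]
    have hgetm : PySem.List.pyGetD comp ((m : Nat) : Int) 0 = comp.getD m 0 := by
      rw [PySem.List.pyGetD_natCast]
    by_cases hrep : minrep N auts m = m
    · -- m starts a new component: DFS from m
      have hneg : comp.getD m 0 = -1 := by
        rw [hinv m (by omega), if_neg (by omega)]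
      set c : Int := ((countMin N auts m : Nat) : Int) with hcdef
      have hc : c ≠ -1 := by rw [hcdef]; omega
      have hstep : (if PySem.List.pyGetD comp ((m : Nat) : Int) 0 = -1 then
          (dfsLoop (adj.length + 1) adj c (PySem.List.pySetD comp ((m : Nat) : Int) c)
            [((m : Nat) : Int)], c + 1)
        else (comp, c)) =
          (dfsLoop (adj.length + 1) adj c (comp.set m c) [((m : Nat) : Int)], c + 1) := by
        rw [hgetm, if_pos hneg, PySem.List.pySetD_natCast]
      set comp1 := comp.set m c with hcomp1
      have hlen1 : comp1.length = N := by rw [hcomp1, List.length_set, hlen]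
      have hg1 : ∀ i, i < N → comp1.getD i 0 = (if i = m then c else comp.getD i 0) := by
        intro i hi
        by_cases hmi : i = m
        · rw [hmi, getDl_set_self _ _ _ _ (by omega), if_pos rfl]
        · rw [getDl_set_ne _ _ _ _ _ hmi, if_neg hmi]
      have hLs : ∀ k, k < N → comp1.getD k 0 = c → k = m := by
        intro k hk hkc
        rw [hg1 k hk] at hkc
        by_cases hkm : k = m
        · exact hkm
        · rw [if_neg hkm] at hkc
          rw [hinv k hk] at hkc
          by_cases h : minrep N auts k < m
          · rw [if_pos h] at hkc
            exfalso
            have hmrk : minrep N auts (minrep N auts k) = minrep N auts k := minrep_idem N auts k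
            have hstrict := countMin_strict h hmrk
            rw [hcdef] at hkc
            omega
          · rw [if_neg h] at hkc
            exact absurd hkc.symm hc
      obtain ⟨compF, hF, hlenF, hiffF, hunchF⟩ :=
        dfs_loop_spec hadj hEb hcompl hc (show m < N by omega) (adj.length + 1) comp1
          [((m : Nat) : Int)] hlen1
          (by rw [hg1 m (by omega), if_pos rfl])
          (by
            intro z hz
            have hzm : z = ((m : Nat) : Int) := by simpa using hz
            exact ⟨m, by omega, hzm, by rw [hg1 m (by omega), if_pos rfl]⟩)
          (by
            intro k hk hkc
            rw [hLs k hk hkc]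
            exact conn_refl N auts m)
          (by
            intro k hk hkc hkn
            exfalso
            rw [hLs k hk hkc] at hkn
            simp at hkn)
          (by
            intro k hk h1 h2 j hj hcj
            have hkm : k ≠ m := by
              intro he
              rw [he, hg1 m (by omega), if_pos rfl] at h2
              exact h2 rfl
            rw [hg1 k hk, if_neg hkm] at h1 h2
            rw [hinv k hk] at h1 h2
            have hmk : minrep N auts k < m := by
              by_contra hge
              rw [if_neg hge] at h1
              exact h1 rfl
            have hmj : minrep N auts j = minrep N auts k := minrep_conn_eq (conn_symm hcj)
            have hjm : j ≠ m := by
              intro he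
              rw [he] at hmj
              rw [hrep] at hmj
              omega
            rw [hg1 j hj, if_neg hjm, hinv j hj, hmj, if_pos hmk]
            constructor
            · omega
            · have hmrk : minrep N auts (minrep N auts k) = minrep N auts k := minrep_idem N auts k
              have hstrict := countMin_strict hmk hmrk
              rw [hcdef]
              intro hcast
              have hcc : countMin N auts (minrep N auts k) = countMin N auts m := by
                exact_mod_cast hcast
              omega)
          (by
            have h1 : countNeg N comp1 < N := countNeg_lt (b := m) (by omega)
              (by rw [hg1 m (by omega), if_pos rfl]; exact hc)
            have h2 : adj.length = N := hadj.1
            simp only [List.length_cons, List.length_nil]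
            omega)
      refine ⟨compF, ?_, hlenF, ?_⟩
      · rw [hstep, hF]
        congr 1
        rw [hcdef, countMin_succ, if_pos hrep]
        push_cast
        ring
      · intro i hi
        by_cases hconn : Conn N auts m i
        · have hmi : minrep N auts i = m := by
            rw [← minrep_conn_eq hconn, hrep]
          rw [(hiffF i hi).mpr hconn, hmi, if_pos (by omega), hcdef]
        · have hne : minrep N auts i ≠ m := by
            intro he
            exact hconn (he ▸ minrep_conn N auts i)
          have him : i ≠ m := by
            intro he
            exact hconn (he ▸ conn_refl N auts m)
          rw [hunchF i hi hconn, hg1 i hi, if_neg him, hinv i hi]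
          by_cases hlt : minrep N auts i < m
          · rw [if_pos hlt, if_pos (by omega)]
          · rw [if_neg hlt, if_neg (by omega)]
    · -- m belongs to an earlier component: skip
      have hpos : comp.getD m 0 ≠ -1 := by
        have hlt : minrep N auts m < m := by
          have := minrep_le N auts m
          omega
        rw [hinv m (by omega), if_pos hlt]
        omega
      rw [hgetm, if_neg hpos]
      refine ⟨comp, ?_, hlen, ?_⟩
      · congr 2
        rw [countMin_succ, if_neg hrep]
        omega
      · intro i hi
        rw [hinv i hi]
        have hne : minrep N auts i ≠ m := by
          intro he
          have := minrep_idem N auts i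
          rw [he] at this
          exact hrep this
        by_cases hlt : minrep N auts i < m
        · rw [if_pos hlt, if_pos (by omega)]
        · rw [if_neg hlt, if_neg (by omega)]

theorem foldl_id {α β : Type} (l : List β) (init : α) :
    l.foldl (fun acc _ => acc) init = init := by
  induction l generalizing init with
  | nil => rfl
  | cons b l ih => exact ih init

theorem list_eq_map_range {α : Type} (xs : List α) (c : Nat) (d : α) (f : Nat → α)
    (h1 : xs.length = c) (h2 : ∀ l, l < c → xs.getD l d = f l) :
    xs = (List.range c).map f := by
  apply List.ext_getElem
  · simp [h1]
  · intro i hi hj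
    have hic : i < c := by omega
    have := h2 i hic
    rw [List.getD_eq_getElem?_getD, List.getElem?_eq_getElem hi] at this
    simp only [Option.getD_some] at this
    rw [this]
    simp [List.getElem_map, List.getElem_range]

-- B's grouping loop fills the orbit array by label
theorem B_group_loop {N cN : Nat} (keyB : Nat → Nat) (comp : List Int)
    (hcv : ∀ k, k < N → PySem.List.pyGetD comp ((k : Nat) : Int) 0 = ((keyB k : Nat) : Int))
    (hkb : ∀ k, k < N → keyB k < cN) :
    ∀ m, m ≤ N →
      ∃ orb : List (List Int),
        (List.range m).foldl (fun orbits (k : Nat) =>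
          PySem.List.pySetD orbits (PySem.List.pyGetD comp ((k : Nat) : Int) 0)
            (PySem.Set.add
              (PySem.List.pyGetD orbits (PySem.List.pyGetD comp ((k : Nat) : Int) 0) [])
              ((k : Nat) : Int)))
          ((List.range cN).map (fun _ => ([] : List Int))) = orb ∧
        orb.length = cN ∧
        (∀ l, l < cN → orb.getD l [] =
          ((List.range m).filter (fun j => keyB j == l)).map (fun (j : Nat) => ((j : Nat) : Int))) := by
  intro m
  induction m with
  | zero =>
    intro _
    refine ⟨(List.range cN).map (fun _ => ([] : List Int)),
      by rw [List.range_zero, List.foldl_nil], by simp, ?_⟩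
    intro l hl
    rw [List.getD_eq_getElem?_getD, List.getElem?_map, List.getElem?_range hl]
    rfl
  | succ m ih =>
    intro hm
    obtain ⟨orb, hfold, hlen, hget⟩ := ih (by omega)
    rw [List.range_succ, List.foldl_append, hfold, List.foldl_cons, List.foldl_nil]
    have hkm : keyB m < cN := hkb m (by omega)
    have hidx : PySem.List.pyGetD comp ((m : Nat) : Int) 0 = ((keyB m : Nat) : Int) :=
      hcv m (by omega)
    have hcur : PySem.List.pyGetD orb ((keyB m : Nat) : Int) [] = orb.getD (keyB m) [] := by
      rw [PySem.List.pyGetD_natCast]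
    have hnm : PySem.Set.add (orb.getD (keyB m) []) ((m : Nat) : Int) =
        orb.getD (keyB m) [] ++ [((m : Nat) : Int)] := by
      unfold PySem.Set.add
      rw [if_neg]
      intro hmem
      simp only [PySem.Set.contains, List.contains_eq_mem, decide_eq_true_eq] at hmem
      rw [hget _ hkm] at hmem
      obtain ⟨j, hj, hje⟩ := List.mem_map.mp hmem
      have : m = j := by exact_mod_cast hje.symm
      have := List.mem_range.mp (List.mem_filter.mp hj).1
      omega
    refine ⟨_, rfl, ?_, ?_⟩
    · rw [hidx, PySem.List.pySetD_natCast, List.length_set, hlen]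
    · intro l hl
      rw [hidx, hcur, hnm, PySem.List.pySetD_natCast]
      rw [List.filter_append]
      by_cases hlm : l = keyB m
      · subst hlm
        rw [getDl_set_self _ _ _ _ (by rw [hlen]; exact hkm), hget _ hkm, List.map_append]
        congr 1
        have hf : List.filter (fun j => keyB j == keyB m) [m] = [m] := by
          rw [List.filter_singleton, beq_self_eq_true]
          rfl
        rw [hf]
        rfl
      · rw [getDl_set_ne _ _ _ _ _ hlm, hget _ hl, List.map_append]
        have hf : List.filter (fun j => keyB j == l) [m] = [] := by
          rw [List.filter_singleton,
            show (keyB m == l) = false from beq_eq_false_iff_ne.mpr (fun h => hlm h.symm)]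
          rfl
        rw [hf]
        simp

-- characterization of B's output
theorem B_characterization (n : Int) (auts : List (List Int)) (N : Nat) (hn : n = (N : Int))
    (hE : ∀ e ∈ edgesOf N auts, ∃ a b : Nat, e = ((a : Int), (b : Int)) ∧ a < N ∧ b < N) :
    compute_orbits_alt n auts =
      (List.range (countMin N auts N)).map (fun l =>
        ((List.range N).filter (fun j => countMin N auts (minrep N auts j) == l)).map
          (fun (j : Nat) => ((j : Nat) : Int))) := by
  have hrange : PySem.List.pyRange 0 n 1 = (List.range N).map (fun (k : Nat) => ((k : Nat) : Int)) := by
    rw [PySem.List.pyRange_one]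
    subst hn
    simp
  have hEb : ∀ a b : Nat, EdgeR N auts a b → a < N ∧ b < N := by
    intro a b hR
    obtain ⟨a', b', habe, ha', hb'⟩ := hE _ hR
    obtain ⟨h1, h2⟩ := Prod.mk.inj habe
    have : a = a' := by exact_mod_cast h1
    subst this
    have : b = b' := by exact_mod_cast h2
    subst this
    exact ⟨ha', hb'⟩
  have hEdgeC : ∀ e ∈ edgesOf N auts, ∃ a b : Nat, e = ((a : Int), (b : Int)) ∧ a < N ∧ b < N ∧
      Conn N auts a b := by
    intro e he
    obtain ⟨a, b, hab, haN, hbN⟩ := hE e he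
    exact ⟨a, b, hab, haN, hbN, Relation.EqvGen.rel a b (by unfold EdgeR; rw [← hab]; exact he)⟩
  have hok0 : AdjOk N auts ((List.range N).map (fun _ => ([] : List Int))) := by
    refine ⟨by simp, ?_⟩
    intro a ha v hv
    rw [List.getD_eq_getElem?_getD, List.getElem?_map, List.getElem?_range ha] at hv
    simp at hv
  obtain ⟨hokA, hsupA, hmemA⟩ := fold_adj_inv (edgesOf N auts)
    ((List.range N).map (fun _ => ([] : List Int))) hEdgeC hok0
  have hEcompl : ∀ a b : Nat, a < N → b < N → EdgeR N auts a b →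
      ((b : Int) ∈ ((edgesOf N auts).foldl (fun adj e =>
        PySem.List.pySetD
          (PySem.List.pySetD adj e.1 (PySem.List.pyGetD adj e.1 [] ++ [e.2])) e.2
          (PySem.List.pyGetD
            (PySem.List.pySetD adj e.1 (PySem.List.pyGetD adj e.1 [] ++ [e.2])) e.2 [] ++ [e.1]))
        ((List.range N).map (fun _ => ([] : List Int)))).getD a [] ∧
       (a : Int) ∈ ((edgesOf N auts).foldl (fun adj e =>
        PySem.List.pySetD
          (PySem.List.pySetD adj e.1 (PySem.List.pyGetD adj e.1 [] ++ [e.2])) e.2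
          (PySem.List.pyGetD
            (PySem.List.pySetD adj e.1 (PySem.List.pyGetD adj e.1 [] ++ [e.2])) e.2 [] ++ [e.1]))
        ((List.range N).map (fun _ => ([] : List Int)))).getD b []) := by
    intro a b _ _ hR
    exact hmemA _ hR a b rfl
  obtain ⟨comp, hfold2, hlen2, hinv2⟩ := B_outer_loop hokA hEb hEcompl N (le_refl N)
  have hcv : ∀ k, k < N → PySem.List.pyGetD comp ((k : Nat) : Int) 0 =
      ((countMin N auts (minrep N auts k) : Nat) : Int) := by
    intro k hk
    rw [PySem.List.pyGetD_natCast, hinv2 k hk,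
      if_pos (by have := minrep_le N auts k; omega)]
  have hkb : ∀ k, k < N → countMin N auts (minrep N auts k) < countMin N auts N := by
    intro k hk
    exact countMin_strict (by have := minrep_le N auts k; omega) (minrep_idem N auts k)
  obtain ⟨orb, hfold3, hlen3, hget3⟩ :=
    B_group_loop (fun k => countMin N auts (minrep N auts k)) comp hcv hkb N (le_refl N)
  have hrange2 : PySem.List.pyRange 0 ((countMin N auts N : Nat) : Int) 1 =
      (List.range (countMin N auts N)).map (fun (k : Nat) => ((k : Nat) : Int)) := by
    rw [PySem.List.pyRange_one]
    simp
  show compute_orbits_alt n auts = _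
  unfold compute_orbits_alt
  simp only [hrange, List.foldl_map, List.map_map, Function.comp_def]
  rw [nested_fold_eq_edges N auts (fun p i j =>
    PySem.List.pySetD (PySem.List.pySetD p i (PySem.List.pyGetD p i [] ++ [j])) j
      (PySem.List.pyGetD (PySem.List.pySetD p i (PySem.List.pyGetD p i [] ++ [j])) j [] ++ [i]))
    ((List.range N).map (fun _ => ([] : List Int)))]
  rw [hfold2]
  simp only [hrange2, List.map_map, Function.comp_def, PySem.Set.empty]
  rw [hfold3]
  exact list_eq_map_range orb _ [] _ hlen3 hget3

-- the two outputs coincide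
theorem AB_core (n : Int) (auts : List (List Int)) (N : Nat) (hn : n = (N : Int))
    (hE : ∀ e ∈ edgesOf N auts, ∃ a b : Nat, e = ((a : Int), (b : Int)) ∧ a < N ∧ b < N) :
    compute_orbits n auts = compute_orbits_alt n auts := by
  obtain ⟨key, hA, hker⟩ := A_characterization n auts N hn hE
  rw [hA, B_characterization n auts N hn hE]
  have hreps : repsL key N = (List.range N).filter (fun x => decide (minrep N auts x = x)) := by
    unfold repsL
    apply List.filter_congr
    intro x hx
    have hxN := List.mem_range.mp hx
    rw [decide_eq_decide]
    rw [minrep_eq_self_iff]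
    constructor
    · intro h l hl hc
      exact h l hl ((hker l x (by omega) hxN).mpr hc)
    · intro h l hl hk
      exact h l hl ((hker l x (by omega) hxN).mp hk)
  rw [hreps]
  have hrangeC : List.range (countMin N auts N) =
      ((List.range N).filter (fun x => decide (minrep N auts x = x))).map
        (fun x => (List.range x).countP (fun x => decide (minrep N auts x = x))) :=
    (filter_map_countP (fun x => decide (minrep N auts x = x)) N).symm
  rw [hrangeC, List.map_map]
  apply List.map_congr_left
  intro r hr
  have hrmem := List.mem_filter.mp hr
  have hrN := List.mem_range.mp hrmem.1
  have hrrep : minrep N auts r = r := by simpa using hrmem.2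
  show classM key N r = _
  unfold classM
  simp only [Function.comp_apply]
  congr 1
  apply List.filter_congr
  intro j hj
  have hjN := List.mem_range.mp hj
  have hcm : (List.range r).countP (fun x => decide (minrep N auts x = x)) =
      countMin N auts r := rfl
  rw [hcm, Bool.eq_iff_iff]
  simp only [beq_iff_eq]
  constructor
  · intro hk
    have hconn := (hker j r hjN hrN).mp hk
    rw [minrep_conn_eq hconn, hrrep]
  · intro hcnt
    have hmj : minrep N auts j = r := countMin_inj (minrep_idem N auts j) hrrep hcnt
    apply (hker j r hjN hrN).mpr
    exact conn_symm (hmj ▸ minrep_conn N auts j)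

theorem edges_ok (n : Int) (auts : List (List Int)) (hpre : Pre_compute_orbits n auts)
    (hn : 0 ≤ n) :
    ∀ e ∈ edgesOf n.toNat auts,
      ∃ a b : Nat, e = ((a : Int), (b : Int)) ∧ a < n.toNat ∧ b < n.toNat := by
  intro e he
  unfold edgesOf at he
  obtain ⟨aut, haut, he2⟩ := List.mem_flatMap.mp he
  obtain ⟨i, hi, rfl⟩ := List.mem_map.mp he2
  have hiN := List.mem_range.mp hi
  obtain ⟨hlen, hvals⟩ := hpre aut haut
  have hilen : i < aut.length := by omega
  have hget : PySem.List.pyGetD aut ((i : Nat) : Int) 0 = aut[i] := by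
    rw [PySem.List.pyGetD_natCast]
    exact List.getD_eq_getElem aut 0 hilen
  have htlen : i < (aut.take n.toNat).length := by
    simp only [List.length_take]
    omega
  have hmemtake : aut[i] ∈ aut.take n.toNat := by
    have h1 : (aut.take n.toNat)[i]'htlen = aut[i] := List.getElem_take
    exact h1 ▸ List.getElem_mem htlen
  obtain ⟨h0, hlt⟩ := hvals _ hmemtake
  refine ⟨i, (aut[i]).toNat, ?_, hiN, by omega⟩
  rw [hget]
  have : ((aut[i].toNat : Nat) : Int) = aut[i] := Int.toNat_of_nonneg h0
  rw [this]


-- ===== VERDICT (by name: the statement is the Claim_ definition above) =====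
theorem compute_orbits_spec : Claim_equal_compute_orbits := by
  unfold Claim_equal_compute_orbits Spec_compute_orbits
  intro n auts _ hpre
  by_cases hn : 0 ≤ n
  · exact AB_core n auts n.toNat (by omega) (edges_ok n auts hpre hn)
  · have hnil : PySem.List.pyRange 0 n 1 = [] := PySem.List.pyRange_one_eq_nil (by omega)
    unfold compute_orbits compute_orbits_alt
    simp only [hnil, List.foldl_nil, List.map_nil, foldl_id]
    rfl
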